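-- pv_equiv track=rewrite | github.com/chjung99/codetree-TILs | 241008/고대 문명 유적 탐사/ancient-ruin-exploration.py | get_rotate_cand_list
-- ===== SOURCE A (Python) =====
-- from collections import deque
-- from copy import deepcopy
--
-- def rotate_square_clockwise_90(left_x, left_y, board):
--     new_board = deepcopy(board)
--     for i in range(R):
--         for j in range(R):
--             new_board[left_x + j][left_y + R-1-i] = board[left_x + i][left_y + j]
--     return new_board
--
-- def rotate_square_clockwise_degree(left_x, left_y, deg, board):
--     new_board = deepcopy(board)
--     for i in range(deg // 90):
--         new_board = rotate_square_clockwise_90(left_x, left_y, new_board)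
--     return new_board
--
-- def out_of_range(x, y):
--     return x < 0 or x >= N or y < 0 or y >= N
--
-- def bfs(cx, cy, board, visit):
--     group = [[cx, cy]]
--     visit[cx][cy] = 1
--     queue = deque([[cx, cy]])
--     while queue:
--         cx, cy = queue.popleft()
--         for i in range(4):
--             nx, ny = cx + dx[i], cy + dy[i]
--             if out_of_range(nx, ny) or visit[nx][ny]:
--                 continue
--             if board[nx][ny] == board[cx][cy]:
--                 visit[nx][ny] = 1
--                 queue.append([nx, ny])
--                 group.append([nx, ny])
--     return group
--
-- def calc_init_value(board):
--     init_value = 0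
--     visit = [[0 for _ in range(N)]for __ in range(N)]
--     for i in range(N):
--         for j in range(N):
--             if not visit[i][j]:
--                 cnt = len(bfs(i, j, board, visit))
--                 if cnt >= 3:
--                     init_value += cnt
--     return init_value
--
-- def get_rotate_cand_list(board):
--     cand_list = []
--     # [1차획득 가치, 회전각도, left_y, left_x]
--     for x in range(R):
--         for y in range(R):
--             for d in [90, 180, 270]:
--                 new_board = rotate_square_clockwise_degree(x, y, d, board)
--                 init_value = calc_init_value(new_board)
--                 cand_list.append([init_value, d, y, x])
--     return cand_list
--
-- N = 5
--
-- R = 3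
--
-- dx = [-1, 0, 1, 0]
--
-- dy = [0, 1, 0, -1]
-- ===== SOURCE B (Python) =====
-- def _score(b):
--     # count cells lying in a 4-connected equal-value group of size >= 3
--     total = 0
--     for i in range(5):
--         for j in range(5):
--             comp = {(i, j)}
--             while True:
--                 nxt = set(comp)
--                 for (a, c) in comp:
--                     for (na, nc) in ((a - 1, c), (a + 1, c), (a, c + 1), (a, c - 1)):
--                         if 0 <= na < 5 and 0 <= nc < 5 and b[na][nc] == b[a][c]:
--                             nxt.add((na, nc))
--                 if len(nxt) == len(comp):
--                     break
--                 comp = nxt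
--             if len(comp) >= 3:
--                 total += 1
--     return total
--
--
-- def _rotated(win, x, y, d):
--     # closed-form clockwise rotation of the 3x3 block at (x, y) by d degrees
--     def cell(i, j):
--         if x <= i < x + 3 and y <= j < y + 3:
--             a, b = i - x, j - y
--             if d == 90:
--                 sa, sb = 2 - b, a
--             elif d == 180:
--                 sa, sb = 2 - a, 2 - b
--             else:
--                 sa, sb = b, 2 - a
--             return win[x + sa][y + sb]
--         return win[i][j]
--     return [[cell(i, j) for j in range(5)] for i in range(5)]
--
--
-- def get_rotate_cand_list(board):
--     win = [row[:5] for row in board[:5]]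
--     cand_list = []
--     for x in range(3):
--         for y in range(3):
--             for d in (90, 180, 270):
--                 cand_list.append([_score(_rotated(win, x, y, d)), d, y, x])
--     return cand_list
-- ===== Notes on version B (the rewrite author's own statement) =====
-- stated objective: alternative
-- what changed: Rotations are computed by a closed-form index map on the extracted 5x5 window (instead of iterated 90-degree rotations over deepcopies of the whole board), and the BFS-with-shared-visit component scorer is replaced by a per-cell frontier-closure scorer that counts the cells lying in equal-value 4-connected groups of size >= 3.
import Mathlib
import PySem

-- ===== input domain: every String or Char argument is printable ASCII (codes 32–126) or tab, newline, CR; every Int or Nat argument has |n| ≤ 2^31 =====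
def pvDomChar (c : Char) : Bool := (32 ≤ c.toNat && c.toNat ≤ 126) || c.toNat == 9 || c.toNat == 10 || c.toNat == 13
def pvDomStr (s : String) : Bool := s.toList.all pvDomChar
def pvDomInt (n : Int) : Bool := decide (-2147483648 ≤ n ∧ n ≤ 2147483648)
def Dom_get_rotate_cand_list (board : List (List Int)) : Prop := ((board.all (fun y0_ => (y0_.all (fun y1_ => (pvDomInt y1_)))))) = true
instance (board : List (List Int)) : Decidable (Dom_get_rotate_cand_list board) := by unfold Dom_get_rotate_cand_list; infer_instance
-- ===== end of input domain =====

-- B replaces A's iterated-90°-rotation + shared-visit BFS scorer by a closed-form rotation of the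
-- extracted 5x5 window and a per-cell frontier-closure scorer counting cells in groups of size ≥ 3.

-- ===== PORT A =====

-- board/visit cell access: b[x][y] (all executed accesses are in range under Pre_, so the defaults are never observed)
def vget (v : List (List Int)) (x y : Int) : Int :=
  PySem.List.pyGetD (PySem.List.pyGetD v x []) y 0

-- board/visit cell update: b[x][y] = w
def vset (v : List (List Int)) (x y : Int) (w : Int) : List (List Int) :=
  PySem.List.pySetD v x (PySem.List.pySetD (PySem.List.pyGetD v x []) y w)

def dxA : List Int := [-1, 0, 1, 0]
def dyA : List Int := [0, 1, 0, -1]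

def outOfRangeA (x y : Int) : Bool :=
  decide (x < 0) || decide (x ≥ 5) || decide (y < 0) || decide (y ≥ 5)

-- the body of bfs's while-loop; fuel only makes the recursion total (1000 always suffices under Pre_)
def bfsLoop (b : List (List Int)) :
    Nat → List (Int × Int) → List (Int × Int) → List (List Int) → List (Int × Int) × List (List Int)
  | 0, _, group, visit => (group, visit)
  | _ + 1, [], group, visit => (group, visit)
  | fuel + 1, (cx, cy) :: rest, group, visit =>
      let st := (PySem.List.pyRange 0 4 1).foldl (fun st i =>
        let nx := cx + PySem.List.pyGetD dxA i 0
        let ny := cy + PySem.List.pyGetD dyA i 0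
        if outOfRangeA nx ny || (vget st.2.2 nx ny != 0) then st
        else if vget b nx ny == vget b cx cy then
          (st.1 ++ [(nx, ny)], st.2.1 ++ [(nx, ny)], vset st.2.2 nx ny 1)
        else st) (rest, group, visit)
      bfsLoop b fuel st.1 st.2.1 st.2.2

def bfsA (cx cy : Int) (b visit : List (List Int)) : List (Int × Int) × List (List Int) :=
  bfsLoop b 1000 [(cx, cy)] [(cx, cy)] (vset visit cx cy 1)

def calcInitValue (b : List (List Int)) : Int :=
  let visit0 : List (List Int) := List.replicate 5 (List.replicate 5 0)
  let st := (PySem.List.pyRange 0 5 1).foldl (fun st i =>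
      (PySem.List.pyRange 0 5 1).foldl (fun st j =>
        if vget st.2 i j == 0 then
          let r := bfsA i j b st.2
          let cnt : Int := r.1.length
          (if 3 ≤ cnt then st.1 + cnt else st.1, r.2)
        else st) st) ((0 : Int), visit0)
  st.1

def rot90A (lx ly : Int) (b : List (List Int)) : List (List Int) :=
  (PySem.List.pyRange 0 3 1).foldl (fun nb i =>
    (PySem.List.pyRange 0 3 1).foldl (fun nb j =>
      vset nb (lx + j) (ly + 2 - i) (vget b (lx + i) (ly + j))) nb) b

def rotDegA (lx ly d : Int) (b : List (List Int)) : List (List Int) :=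
  (PySem.List.pyRange 0 (PySem.Int.floordiv d 90) 1).foldl (fun nb _ => rot90A lx ly nb) b

def get_rotate_cand_list (board : List (List Int)) : List (List Int) :=
  (PySem.List.pyRange 0 3 1).foldl (fun cl x =>
    (PySem.List.pyRange 0 3 1).foldl (fun cl y =>
      ([90, 180, 270] : List Int).foldl (fun cl d =>
        let nb := rotDegA x y d board
        let iv := calcInitValue nb
        cl ++ [[iv, d, y, x]]) cl) cl) []

-- ===== PORT B =====

-- win = [row[:5] for row in board[:5]]
def winB (board : List (List Int)) : List (List Int) :=
  (PySem.List.slice board none (some 5)).map (fun row => PySem.List.slice row none (some 5))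

-- closed-form rotation of the 3x3 block at (x, y) by d degrees, built as a fresh 5x5 board
def rotatedB (win : List (List Int)) (x y d : Int) : List (List Int) :=
  (PySem.List.pyRange 0 5 1).map (fun i =>
    (PySem.List.pyRange 0 5 1).map (fun j =>
      if x ≤ i ∧ i < x + 3 ∧ y ≤ j ∧ j < y + 3 then
        let a := i - x
        let c := j - y
        let s : Int × Int := if d = 90 then (2 - c, a) else if d = 180 then (2 - a, 2 - c) else (c, 2 - a)
        vget win (x + s.1) (y + s.2)
      else vget win i j))

def nbrsB (a c : Int) : List (Int × Int) := [(a - 1, c), (a + 1, c), (a, c + 1), (a, c - 1)]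

-- one pass of the frontier closure: nxt = set(comp) plus every in-range equal-valued neighbour
def bStep (b : List (List Int)) (comp : PySem.Set (Int × Int)) : PySem.Set (Int × Int) :=
  comp.foldl (fun nxt p =>
    (nbrsB p.1 p.2).foldl (fun nxt q =>
      if decide (0 ≤ q.1) && decide (q.1 < 5) && decide (0 ≤ q.2) && decide (q.2 < 5)
          && (vget b q.1 q.2 == vget b p.1 p.2) then PySem.Set.add nxt q
      else nxt) nxt) comp

-- the while-True loop; fuel only makes the recursion total (26 always suffices on a 5x5 board)
def bClosure (b : List (List Int)) : Nat → PySem.Set (Int × Int) → PySem.Set (Int × Int)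
  | 0, comp => comp
  | fuel + 1, comp =>
      let nxt := bStep b comp
      if nxt.length = comp.length then comp else bClosure b fuel nxt

def scoreB (b : List (List Int)) : Int :=
  (PySem.List.pyRange 0 5 1).foldl (fun tot i =>
    (PySem.List.pyRange 0 5 1).foldl (fun tot j =>
      let comp := bClosure b 26 (PySem.Set.ofList [(i, j)])
      if 3 ≤ comp.length then tot + 1 else tot) tot) (0 : Int)

def get_rotate_cand_list_alt (board : List (List Int)) : List (List Int) :=
  let win := winB board
  (PySem.List.pyRange 0 3 1).foldl (fun cl x =>
    (PySem.List.pyRange 0 3 1).foldl (fun cl y =>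
      ([90, 180, 270] : List Int).foldl (fun cl d =>
        cl ++ [[scoreB (rotatedB win x y d), d, y, x]]) cl) cl) []

-- ===== PRECONDITION & SPEC =====

-- Pre_ excludes exactly the boards on which the Python A raises IndexError: those with fewer than
-- 5 rows, or one of the first 5 rows shorter than 5 (A indexes board[i][j] for all 0 ≤ i, j < 5).
def Pre_get_rotate_cand_list (board : List (List Int)) : Prop :=
  5 ≤ board.length ∧ ∀ r ∈ board.take 5, 5 ≤ r.length

instance (board : List (List Int)) : Decidable (Pre_get_rotate_cand_list board) := by
  unfold Pre_get_rotate_cand_list; infer_instance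

def pvWitness_get_rotate_cand_list : List (List Int) :=
  [[1, 1, 0, 0, 2], [0, 1, 0, 2, 2], [0, 1, 0, 0, 3], [4, 4, 0, 3, 3], [4, 4, 0, 0, 3]]

def Spec_get_rotate_cand_list (board : List (List Int)) (out : List (List Int)) : Prop := out = get_rotate_cand_list_alt board
instance (board : List (List Int)) (out : List (List Int)) : Decidable (Spec_get_rotate_cand_list board out) := by unfold Spec_get_rotate_cand_list; infer_instance

-- ===== CLAIM (what is proved, stated in full; the proofs are below) =====
def Claim_equal_get_rotate_cand_list : Prop := ∀ (board : List (List Int)), Dom_get_rotate_cand_list board → Pre_get_rotate_cand_list board → Spec_get_rotate_cand_list board (get_rotate_cand_list board)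


-- ===== LEMMAS AND PROOFS =====

-- ---- abstract components of the equal-value 4-adjacency graph on the 5x5 grid ----

def inGb (p : Int × Int) : Bool :=
  decide (0 ≤ p.1) && decide (p.1 < 5) && decide (0 ≤ p.2) && decide (p.2 < 5)

def gridL : List (Int × Int) :=
  (List.range 5).flatMap (fun i => (List.range 5).map (fun j => (Int.ofNat i, Int.ofNat j)))

def gridF : Finset (Int × Int) := gridL.toFinset

theorem mem_gridL (p : Int × Int) : p ∈ gridL ↔ inGb p = true := by
  obtain ⟨a, b⟩ := p
  rw [gridL, List.mem_flatMap]
  constructor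
  · rintro ⟨i, hi, hmem⟩
    rw [List.mem_map] at hmem
    obtain ⟨j, hj, heq⟩ := hmem
    rw [List.mem_range] at hi hj
    simp only [Prod.mk.injEq] at heq
    obtain ⟨rfl, rfl⟩ := heq
    simp only [inGb, Bool.and_eq_true, decide_eq_true_eq, Int.ofNat_eq_natCast]
    omega
  · intro h
    simp only [inGb, Bool.and_eq_true, decide_eq_true_eq] at h
    have ha : a.toNat ∈ List.range 5 := List.mem_range.mpr (by omega)
    have hb : b.toNat ∈ List.range 5 := List.mem_range.mpr (by omega)
    refine ⟨a.toNat, ha, List.mem_map.mpr ⟨b.toNat, hb, ?_⟩⟩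
    simp only [Prod.mk.injEq, Int.ofNat_eq_natCast]
    omega

theorem mem_gridF (p : Int × Int) : p ∈ gridF ↔ inGb p = true := by
  rw [gridF, List.mem_toFinset]; exact mem_gridL p

theorem nodup_gridL : gridL.Nodup := by decide

theorem card_gridF : gridF.card = 25 := by
  rw [gridF, List.toFinset_card_of_nodup nodup_gridL]; rfl

def adjB (f : Int → Int → Int) (p q : Int × Int) : Bool :=
  inGb p && inGb q && ((p.1 - q.1).natAbs + (p.2 - q.2).natAbs == 1) && (f p.1 p.2 == f q.1 q.2)

theorem adjB_symm (f : Int → Int → Int) (p q : Int × Int) (h : adjB f p q = true) :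
    adjB f q p = true := by
  simp only [adjB, Bool.and_eq_true, beq_iff_eq] at h ⊢
  refine ⟨⟨⟨h.1.1.2, h.1.1.1⟩, by omega⟩, h.2.symm⟩

def cstepF (f : Int → Int → Int) (S : Finset (Int × Int)) : Finset (Int × Int) :=
  S ∪ gridF.filter (fun q => ∃ p ∈ S, adjB f p q = true)

def compF (f : Int → Int → Int) (p : Int × Int) : Finset (Int × Int) :=
  (cstepF f)^[25] {p}

def reach (f : Int → Int → Int) (p q : Int × Int) : Prop :=
  Relation.ReflTransGen (fun a c => adjB f a c = true) p q

theorem subset_cstepF (f : Int → Int → Int) (S : Finset (Int × Int)) : S ⊆ cstepF f S :=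
  Finset.subset_union_left

theorem cstepF_subset_grid (f : Int → Int → Int) (S : Finset (Int × Int)) (h : S ⊆ gridF) :
    cstepF f S ⊆ gridF := by
  unfold cstepF
  exact Finset.union_subset h (Finset.filter_subset _ _)

theorem iterate_subset_grid (f : Int → Int → Int) (p : Int × Int) (hp : inGb p = true) :
    ∀ n, (cstepF f)^[n] {p} ⊆ gridF := by
  intro n
  induction n with
  | zero => simpa [Finset.singleton_subset_iff, mem_gridF] using hp
  | succ n ih => rw [Function.iterate_succ_apply']; exact cstepF_subset_grid f _ ih

theorem compF_subset_grid (f : Int → Int → Int) (p : Int × Int) (hp : inGb p = true) :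
    compF f p ⊆ gridF := iterate_subset_grid f p hp 25

theorem mem_iterate_reach (f : Int → Int → Int) (p : Int × Int) :
    ∀ n q, q ∈ (cstepF f)^[n] {p} → reach f p q := by
  intro n
  induction n with
  | zero => intro q hq; simp at hq; subst hq; exact Relation.ReflTransGen.refl
  | succ n ih =>
      intro q hq
      rw [Function.iterate_succ_apply'] at hq
      rcases Finset.mem_union.1 hq with h | h
      · exact ih q h
      · rcases Finset.mem_filter.1 h with ⟨_, r, hr, hadj⟩
        exact Relation.ReflTransGen.tail (ih r hr) hadj

theorem iterate_card_grow (f : Int → Int → Int) (p : Int × Int) :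
    ∀ n, (∀ k < n, cstepF f ((cstepF f)^[k] {p}) ≠ (cstepF f)^[k] {p}) →
      n < ((cstepF f)^[n] {p}).card := by
  intro n
  induction n with
  | zero => intro _; simp
  | succ n ih =>
      intro h
      have hne := h n (Nat.lt_succ_self n)
      have hlt : ((cstepF f)^[n] {p}).card < ((cstepF f)^[n + 1] {p}).card := by
        rw [Function.iterate_succ_apply']
        exact Finset.card_lt_card (Finset.ssubset_iff_subset_ne.2
          ⟨subset_cstepF f _, fun he => hne he.symm⟩)
      have := ih (fun k hk => h k (Nat.lt_succ_of_lt hk))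
      omega

theorem exists_fix (f : Int → Int → Int) (p : Int × Int) (hp : inGb p = true) :
    ∃ k ≤ 24, cstepF f ((cstepF f)^[k] {p}) = (cstepF f)^[k] {p} := by
  by_contra hc
  push Not at hc
  have h25 : 25 < ((cstepF f)^[25] {p}).card := by
    apply iterate_card_grow
    intro k hk
    exact hc k (by omega)
  have hle : ((cstepF f)^[25] {p}).card ≤ 25 := by
    have := Finset.card_le_card (iterate_subset_grid f p hp 25)
    rwa [card_gridF] at this
  omega

theorem compF_fixed (f : Int → Int → Int) (p : Int × Int) (hp : inGb p = true) :
    cstepF f (compF f p) = compF f p := by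
  obtain ⟨k, hk, hfix⟩ := exists_fix f p hp
  have hstab : ∀ m, (cstepF f)^[k + m] {p} = (cstepF f)^[k] {p} := by
    intro m
    induction m with
    | zero => rfl
    | succ m ih => rw [Nat.add_succ, Function.iterate_succ_apply', ih, hfix]
  have h1 : compF f p = (cstepF f)^[k] {p} := by
    have := hstab (25 - k)
    rw [Nat.add_sub_cancel' (by omega : k ≤ 25)] at this
    exact this
  rw [h1, hfix]

theorem mem_compF_self (f : Int → Int → Int) (p : Int × Int) : p ∈ compF f p := by
  have h : ∀ n, p ∈ (cstepF f)^[n] {p} := by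
    intro n
    induction n with
    | zero => simp
    | succ n ih => rw [Function.iterate_succ_apply']; exact subset_cstepF f _ ih
  exact h 25

theorem reach_mem_compF (f : Int → Int → Int) (p q : Int × Int) (hp : inGb p = true)
    (h : reach f p q) : q ∈ compF f p := by
  induction h with
  | refl => exact mem_compF_self f p
  | tail _ hadj ih =>
      rename_i r s _
      rw [← compF_fixed f p hp]
      apply Finset.mem_union_right
      refine Finset.mem_filter.2 ⟨?_, r, ih, hadj⟩
      rw [mem_gridF]
      simp only [adjB, Bool.and_eq_true] at hadj
      exact hadj.1.1.2

theorem mem_compF_iff (f : Int → Int → Int) (p q : Int × Int) (hp : inGb p = true) :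
    q ∈ compF f p ↔ reach f p q :=
  ⟨mem_iterate_reach f p 25 q, reach_mem_compF f p q hp⟩

theorem reach_symm (f : Int → Int → Int) (p q : Int × Int) (h : reach f p q) : reach f q p :=
  Relation.ReflTransGen.symmetric (fun _ _ ha => adjB_symm f _ _ ha) h

theorem compF_eq_of_mem (f : Int → Int → Int) (p q : Int × Int) (hp : inGb p = true)
    (hq : q ∈ compF f p) : compF f p = compF f q := by
  have hqg : inGb q = true := (mem_gridF q).1 (compF_subset_grid f p hp hq)
  have hpq : reach f p q := (mem_compF_iff f p q hp).1 hq
  ext x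
  rw [mem_compF_iff f p x hp, mem_compF_iff f q x hqg]
  exact ⟨fun h => Relation.ReflTransGen.trans (reach_symm f p q hpq) h,
         fun h => Relation.ReflTransGen.trans hpq h⟩

def bigSet (f : Int → Int → Int) : Finset (Int × Int) :=
  gridF.filter (fun p => 3 ≤ (compF f p).card)

def scoreSpec (f : Int → Int → Int) : Int := (bigSet f).card

-- ---- congruence: everything only reads f on the grid ----

theorem adjB_congr (f g : Int → Int → Int)
    (h : ∀ x y, 0 ≤ x → x < 5 → 0 ≤ y → y < 5 → f x y = g x y) (p q : Int × Int) :
    adjB f p q = adjB g p q := by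
  cases hp : inGb p with
  | false => simp [adjB, hp]
  | true =>
    cases hq : inGb q with
    | false => simp [adjB, hp, hq]
    | true =>
      have h1 : f p.1 p.2 = g p.1 p.2 := by
        simp only [inGb, Bool.and_eq_true, decide_eq_true_eq] at hp
        exact h _ _ hp.1.1.1 hp.1.1.2 hp.1.2 hp.2
      have h2 : f q.1 q.2 = g q.1 q.2 := by
        simp only [inGb, Bool.and_eq_true, decide_eq_true_eq] at hq
        exact h _ _ hq.1.1.1 hq.1.1.2 hq.1.2 hq.2
      simp [adjB, hp, hq, h1, h2]

theorem compF_congr (f g : Int → Int → Int)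
    (h : ∀ x y, 0 ≤ x → x < 5 → 0 ≤ y → y < 5 → f x y = g x y) (p : Int × Int) :
    compF f p = compF g p := by
  have hstep : ∀ S, cstepF f S = cstepF g S := by
    intro S
    ext x
    simp only [cstepF, Finset.mem_union, Finset.mem_filter]
    constructor
    · rintro (hx | ⟨hg, r, hr, hadj⟩)
      · exact Or.inl hx
      · exact Or.inr ⟨hg, r, hr, by rw [← adjB_congr f g h]; exact hadj⟩
    · rintro (hx | ⟨hg, r, hr, hadj⟩)
      · exact Or.inl hx
      · exact Or.inr ⟨hg, r, hr, by rw [adjB_congr f g h]; exact hadj⟩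
  have : ∀ n, (cstepF f)^[n] {p} = (cstepF g)^[n] {p} := by
    intro n
    induction n with
    | zero => rfl
    | succ n ih => rw [Function.iterate_succ_apply', Function.iterate_succ_apply', ih, hstep]
  exact this 25

theorem scoreSpec_congr (f g : Int → Int → Int)
    (h : ∀ x y, 0 ≤ x → x < 5 → 0 ≤ y → y < 5 → f x y = g x y) :
    scoreSpec f = scoreSpec g := by
  have hset : bigSet f = bigSet g := by
    ext p
    simp only [bigSet, Finset.mem_filter, compF_congr f g h p]
  rw [scoreSpec, scoreSpec, hset]



-- ---- visit/board matrix access lemmas ----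

def wf5 (v : List (List Int)) : Prop :=
  5 ≤ v.length ∧ ∀ i : Nat, i < 5 → 5 ≤ (v.getD i []).length

theorem pySetD_of_nonneg {α : Type} (xs : List α) (i : Int) (v : α) (h0 : 0 ≤ i)
    (h : i.toNat < xs.length) : PySem.List.pySetD xs i v = xs.set i.toNat v := by
  obtain ⟨n, rfl⟩ := Int.eq_ofNat_of_zero_le h0
  simp only [Int.toNat_natCast] at h ⊢
  rw [PySem.List.pySetD, PySem.List.pySet?_natCast _ _ _ h, Option.getD_some]

theorem getD_set_self {α : Type} (l : List α) (i : Nat) (w d : α) (h : i < l.length) :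
    (l.set i w).getD i d = w := by
  rw [List.getD_eq_getElem?_getD, List.getElem?_set_self h, Option.getD_some]

theorem getD_set_ne {α : Type} (l : List α) (i j : Nat) (w d : α) (h : i ≠ j) :
    (l.set i w).getD j d = l.getD j d := by
  rw [List.getD_eq_getElem?_getD, List.getElem?_set_ne h, ← List.getD_eq_getElem?_getD]

theorem vget_toGetD (v : List (List Int)) (x y : Int) (hx0 : 0 ≤ x) (hy0 : 0 ≤ y) :
    vget v x y = (v.getD x.toNat []).getD y.toNat 0 := by
  rw [vget, PySem.List.pyGetD_of_nonneg _ _ hy0, PySem.List.pyGetD_of_nonneg _ _ hx0]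

theorem vset_toSet (v : List (List Int)) (x y w : Int) (hw : wf5 v)
    (hx0 : 0 ≤ x) (hx : x < 5) (hy0 : 0 ≤ y) (hy : y < 5) :
    vset v x y w = v.set x.toNat ((v.getD x.toNat []).set y.toNat w) := by
  obtain ⟨hl, hr⟩ := hw
  have hyl : y.toNat < (v.getD x.toNat []).length := by
    have := hr x.toNat (by omega); omega
  rw [vset, PySem.List.pyGetD_of_nonneg _ _ hx0,
     pySetD_of_nonneg _ _ _ hy0 hyl, pySetD_of_nonneg _ _ _ hx0 (by omega)]

theorem wf5_vset (v : List (List Int)) (x y w : Int) (hw : wf5 v)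
    (hx0 : 0 ≤ x) (hx : x < 5) (hy0 : 0 ≤ y) (hy : y < 5) :
    wf5 (vset v x y w) := by
  rw [vset_toSet v x y w hw hx0 hx hy0 hy]
  obtain ⟨hl, hr⟩ := hw
  constructor
  · rw [List.length_set]; exact hl
  · intro i hi
    by_cases hix : i = x.toNat
    · rw [hix, getD_set_self _ _ _ _ (by omega), List.length_set]
      exact hr x.toNat (by omega)
    · rw [getD_set_ne _ _ _ _ _ (fun he => hix he.symm)]
      exact hr i hi

theorem vget_vset (v : List (List Int)) (a b w x y : Int) (hw : wf5 v)
    (ha0 : 0 ≤ a) (ha : a < 5) (hb0 : 0 ≤ b) (hb : b < 5)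
    (hx0 : 0 ≤ x) (hx : x < 5) (hy0 : 0 ≤ y) (hy : y < 5) :
    vget (vset v a b w) x y = if x = a ∧ y = b then w else vget v x y := by
  obtain ⟨hl, hr⟩ := hw
  rw [vset_toSet v a b w ⟨hl, hr⟩ ha0 ha hb0 hb,
      vget_toGetD _ x y hx0 hy0, vget_toGetD v x y hx0 hy0]
  by_cases hxa : x.toNat = a.toNat
  · have hx_eq : x = a := by omega
    rw [hxa, getD_set_self _ _ _ _ (by omega)]
    by_cases hyb : y.toNat = b.toNat
    · have hy_eq : y = b := by omega
      rw [hyb, getD_set_self _ _ _ _ (by have := hr a.toNat (by omega); omega)]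
      simp [hx_eq, hy_eq]
    · have hy_ne : ¬(y = b) := by omega
      rw [getD_set_ne _ _ _ _ _ (fun he => hyb he.symm)]
      simp [hy_ne]
  · have hx_ne : ¬(x = a) := by omega
    rw [getD_set_ne _ _ _ _ _ (fun he => hxa he.symm)]
    simp [hx_ne]

theorem inGb_iff (p : Int × Int) :
    inGb p = true ↔ 0 ≤ p.1 ∧ p.1 < 5 ∧ 0 ≤ p.2 ∧ p.2 < 5 := by
  simp [inGb, and_assoc]

def VS (v : List (List Int)) : Finset (Int × Int) :=
  gridF.filter (fun p => vget v p.1 p.2 ≠ 0)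

theorem mem_VS (v : List (List Int)) (p : Int × Int) :
    p ∈ VS v ↔ inGb p = true ∧ vget v p.1 p.2 ≠ 0 := by
  simp [VS, Finset.mem_filter, mem_gridF]

theorem VS_vset_one (v : List (List Int)) (x y : Int) (hw : wf5 v)
    (hg : inGb (x, y) = true) :
    VS (vset v x y 1) = insert (x, y) (VS v) := by
  obtain ⟨hx0, hx, hy0, hy⟩ := (inGb_iff (x, y)).1 hg
  ext p
  obtain ⟨px, py⟩ := p
  simp only [mem_VS, Finset.mem_insert]
  constructor
  · rintro ⟨hpg, hnz⟩
    obtain ⟨hpx0, hpx, hpy0, hpy⟩ := (inGb_iff (px, py)).1 hpg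
    by_cases he : px = x ∧ py = y
    · exact Or.inl (by simp [Prod.ext_iff]; exact he)
    · right
      refine ⟨hpg, ?_⟩
      rwa [vget_vset v x y 1 px py ⟨hw.1, hw.2⟩ hx0 hx hy0 hy hpx0 hpx hpy0 hpy, if_neg he] at hnz
  · rintro (he | ⟨hpg, hnz⟩)
    · obtain ⟨rfl, rfl⟩ : px = x ∧ py = y := by
        simpa [Prod.ext_iff] using he
      refine ⟨hg, ?_⟩
      rw [vget_vset v px py 1 px py hw hx0 hx hy0 hy hx0 hx hy0 hy, if_pos ⟨rfl, rfl⟩]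
      norm_num
    · obtain ⟨hpx0, hpx, hpy0, hpy⟩ := (inGb_iff (px, py)).1 hpg
      refine ⟨hpg, ?_⟩
      rw [vget_vset v x y 1 px py hw hx0 hx hy0 hy hpx0 hpx hpy0 hpy]
      split
      · norm_num
      · exact hnz

def visit0 : List (List Int) := List.replicate 5 (List.replicate 5 0)

theorem wf5_visit0 : wf5 visit0 := by
  constructor
  · simp [visit0]
  · intro i hi
    rw [visit0, List.getD_eq_getElem?_getD, List.getElem?_replicate]
    simp [hi]

theorem vget_visit0 (x y : Int) (hx0 : 0 ≤ x) (hy0 : 0 ≤ y) : vget visit0 x y = 0 := by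
  rw [vget_toGetD _ _ _ hx0 hy0, visit0]
  simp only [List.getD_eq_getElem?_getD, List.getElem?_replicate]
  by_cases h : x.toNat < 5
  · by_cases h2 : y.toNat < 5 <;>
      simp only [h, h2, if_true, if_false, Option.getD_some, Option.getD_none,
        List.getElem?_replicate]
  · simp [h]

theorem VS_visit0 : VS visit0 = ∅ := by
  ext p
  obtain ⟨px, py⟩ := p
  simp only [mem_VS, Finset.notMem_empty, iff_false, not_and]
  intro hg
  obtain ⟨h1, _, h3, _⟩ := (inGb_iff (px, py)).1 hg
  simp [vget_visit0 px py h1 h3]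



-- ---- characterizing A's BFS flood fill ----

def bfsNb (b : List (List Int)) (cx cy : Int)
    (st : List (Int × Int) × List (Int × Int) × List (List Int)) (nx ny : Int) :
    List (Int × Int) × List (Int × Int) × List (List Int) :=
  if outOfRangeA nx ny || (vget st.2.2 nx ny != 0) then st
  else if vget b nx ny == vget b cx cy then
    (st.1 ++ [(nx, ny)], st.2.1 ++ [(nx, ny)], vset st.2.2 nx ny 1)
  else st

theorem bfsLoop_succ (b : List (List Int)) (fuel : Nat) (cx cy : Int)
    (rest group : List (Int × Int)) (visit : List (List Int)) :
    bfsLoop b (fuel + 1) ((cx, cy) :: rest) group visit =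
      (fun st => bfsLoop b fuel st.1 st.2.1 st.2.2)
        (bfsNb b cx cy (bfsNb b cx cy (bfsNb b cx cy (bfsNb b cx cy (rest, group, visit)
          (cx + (-1)) (cy + 0)) (cx + 0) (cy + 1)) (cx + 1) (cy + 0)) (cx + 0) (cy + (-1))) := by
  rfl

theorem outOfRangeA_false_iff (x y : Int) :
    outOfRangeA x y = false ↔ inGb (x, y) = true := by
  simp only [outOfRangeA, inGb, Bool.or_eq_false_iff, decide_eq_false_iff_not, not_lt, not_le,
    Bool.and_eq_true, decide_eq_true_eq]

theorem adjB_neighbors (f : Int → Int → Int) (p q : Int × Int) (h : adjB f p q = true) :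
    (q.1 = p.1 - 1 ∧ q.2 = p.2) ∨ (q.1 = p.1 + 1 ∧ q.2 = p.2) ∨
    (q.1 = p.1 ∧ q.2 = p.2 + 1) ∨ (q.1 = p.1 ∧ q.2 = p.2 - 1) := by
  simp only [adjB, Bool.and_eq_true, beq_iff_eq] at h
  omega

theorem bfsNb_spec (b : List (List Int)) (V0 : Finset (Int × Int)) (s : Int × Int)
    (cx cy nx ny : Int) (q g : List (Int × Int)) (v : List (List Int)) (M : Finset (Int × Int))
    (hs : inGb s = true)
    (hc : (cx, cy) ∈ compF (vget b) s)
    (hdist : (cx - nx).natAbs + (cy - ny).natAbs = 1)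
    (hwf : wf5 v) (hVS : VS v = V0 ∪ M) (hM : M ⊆ compF (vget b) s)
    (hgn : g.Nodup) (hgt : g.toFinset = M) :
    ∃ added M',
      bfsNb b cx cy (q, g, v) nx ny =
        (q ++ added, g ++ added, (bfsNb b cx cy (q, g, v) nx ny).2.2) ∧
      M' = M ∪ added.toFinset ∧
      wf5 (bfsNb b cx cy (q, g, v) nx ny).2.2 ∧
      VS (bfsNb b cx cy (q, g, v) nx ny).2.2 = V0 ∪ M' ∧
      M' ⊆ compF (vget b) s ∧
      (g ++ added).Nodup ∧
      (adjB (vget b) (cx, cy) (nx, ny) = true →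
        (nx, ny) ∈ VS (bfsNb b cx cy (q, g, v) nx ny).2.2) ∧
      VS v ⊆ VS (bfsNb b cx cy (q, g, v) nx ny).2.2 ∧
      (q ++ added).length + 26 * (25 - M'.card) ≤ q.length + 26 * (25 - M.card) := by
  have hcg : inGb (cx, cy) = true := (mem_gridF _).1 (compF_subset_grid _ s hs hc)
  by_cases h1 : (outOfRangeA nx ny || (vget v nx ny != 0)) = true
  · -- skipped: out of range or already visited
    refine ⟨[], M, ?_, by simp, ?_, ?_, hM, by simpa using hgn, ?_, ?_, ?_⟩
    · simp [bfsNb, h1]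
    · simp [bfsNb, h1]; exact hwf
    · simp [bfsNb, h1]; exact hVS
    · intro hadj
      have hng : inGb (nx, ny) = true := by
        simp only [adjB, Bool.and_eq_true] at hadj
        exact hadj.1.1.2
      simp only [bfsNb, h1, if_true]
      rcases Bool.or_eq_true_iff.1 h1 with hoor | hvis
      · rw [← outOfRangeA_false_iff] at hng
        rw [hng] at hoor
        cases hoor
      · rw [mem_VS]
        refine ⟨hng, ?_⟩
        simpa using hvis
    · simp [bfsNb, h1]
    · simp [bfsNb, h1]
  · -- in range and unvisited
    have h1f : (outOfRangeA nx ny || (vget v nx ny != 0)) = false := by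
      simpa using h1
    rcases Bool.or_eq_false_iff.1 h1f with ⟨hoor, hvis⟩
    have hng : inGb (nx, ny) = true := (outOfRangeA_false_iff nx ny).1 hoor
    have hv0 : vget v nx ny = 0 := by simpa using hvis
    have hnotVS : (nx, ny) ∉ VS v := by
      rw [mem_VS]
      simp [hv0]
    by_cases h2 : (vget b nx ny == vget b cx cy) = true
    · -- new cell joins the component
      have hstep : bfsNb b cx cy (q, g, v) nx ny =
          (q ++ [(nx, ny)], g ++ [(nx, ny)], vset v nx ny 1) := by
        simp [bfsNb, h1f, h2]
      have hadj : adjB (vget b) (cx, cy) (nx, ny) = true := by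
        simp only [adjB, Bool.and_eq_true, beq_iff_eq]
        refine ⟨⟨⟨hcg, hng⟩, by simpa using hdist⟩, (beq_iff_eq.1 h2).symm⟩
      have hnc : (nx, ny) ∈ compF (vget b) s := by
        have hr : reach (vget b) s (cx, cy) := (mem_compF_iff _ _ _ hs).1 hc
        exact reach_mem_compF _ _ _ hs (Relation.ReflTransGen.tail hr hadj)
      have hnM : (nx, ny) ∉ M := fun hmem => hnotVS (hVS ▸ Finset.mem_union_right V0 hmem)
      have hbounds := (inGb_iff (nx, ny)).1 hng
      have hsub : insert (nx, ny) M ⊆ compF (vget b) s := by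
        intro z hz
        rcases Finset.mem_insert.1 hz with rfl | hz
        · exact hnc
        · exact hM hz
      refine ⟨[(nx, ny)], insert (nx, ny) M, ?_, by simp, ?_, ?_, hsub, ?_, ?_, ?_, ?_⟩
      · rw [hstep]
      · rw [hstep]
        exact wf5_vset v nx ny 1 hwf hbounds.1 hbounds.2.1 hbounds.2.2.1 hbounds.2.2.2
      · rw [hstep]
        show VS (vset v nx ny 1) = V0 ∪ insert (nx, ny) M
        rw [VS_vset_one v nx ny hwf hng, hVS, Finset.union_insert]
      · rw [List.nodup_append]
        refine ⟨hgn, List.nodup_singleton _, ?_⟩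
        intro a ha z hz
        rw [List.mem_singleton] at hz
        subst hz
        exact fun heq => hnM (hgt ▸ List.mem_toFinset.2 (heq ▸ ha))
      · intro _
        rw [hstep]
        show (nx, ny) ∈ VS (vset v nx ny 1)
        rw [VS_vset_one v nx ny hwf hng]
        exact Finset.mem_insert_self _ _
      · rw [hstep]
        show VS v ⊆ VS (vset v nx ny 1)
        rw [VS_vset_one v nx ny hwf hng]
        exact Finset.subset_insert _ _
      · have hcard : (insert (nx, ny) M).card = M.card + 1 := Finset.card_insert_of_notMem hnM
        have hle : (insert (nx, ny) M).card ≤ 25 := by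
          have h1 := Finset.card_le_card (hsub.trans (compF_subset_grid (vget b) s hs))
          rwa [card_gridF] at h1
        simp only [List.length_append, List.length_singleton, hcard]
        omega
    · -- different value: skipped
      have hstep : bfsNb b cx cy (q, g, v) nx ny = (q, g, v) := by
        simp [bfsNb, h1f, h2]
      refine ⟨[], M, by simp [hstep], by simp, by simp [hstep]; exact hwf,
        by simp [hstep]; exact hVS, hM, by simpa using hgn, ?_, by simp [hstep], by simp⟩
      intro hadj
      simp only [adjB, Bool.and_eq_true, beq_iff_eq] at hadj
      exact absurd (beq_iff_eq.2 hadj.2.symm) (by simpa using h2)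


theorem closed_eq_compF (b : List (List Int)) (V0 : Finset (Int × Int)) (s : Int × Int)
    (v : List (List Int)) (M : Finset (Int × Int)) (hs : inGb s = true)
    (hdisj : ∀ z ∈ V0, z ∉ compF (vget b) s)
    (hVS : VS v = V0 ∪ M) (hM : M ⊆ compF (vget b) s) (hsM : s ∈ M)
    (hclosed : ∀ p ∈ M, ∀ z, adjB (vget b) p z = true → z ∈ VS v) :
    M = compF (vget b) s := by
  apply Finset.Subset.antisymm hM
  have key : ∀ z, reach (vget b) s z → z ∈ M := by
    intro z hreach
    induction hreach with
    | refl => exact hsM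
    | tail hr hadj ihh =>
        rename_i r t
        have htVS : t ∈ VS v := hclosed r ihh t hadj
        rw [hVS] at htVS
        rcases Finset.mem_union.1 htVS with h | h
        · exact absurd (reach_mem_compF _ _ _ hs (Relation.ReflTransGen.tail hr hadj)) (hdisj t h)
        · exact h
  intro z hz
  exact key z ((mem_compF_iff _ _ _ hs).1 hz)

def BInv (b : List (List Int)) (V0 : Finset (Int × Int)) (s : Int × Int)
    (queue group : List (Int × Int)) (v : List (List Int)) (M : Finset (Int × Int)) : Prop :=
  wf5 v ∧ VS v = V0 ∪ M ∧ M ⊆ compF (vget b) s ∧ s ∈ M ∧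
  group.Nodup ∧ group.toFinset = M ∧
  (∀ p ∈ queue, p ∈ M) ∧
  (∀ p ∈ M, p ∉ queue → ∀ z, adjB (vget b) p z = true → z ∈ VS v)

theorem bfsLoop_run (b : List (List Int)) (V0 : Finset (Int × Int)) (s : Int × Int)
    (hs : inGb s = true) (hdisj : ∀ z ∈ V0, z ∉ compF (vget b) s) :
    ∀ (fuel : Nat) (queue group : List (Int × Int)) (v : List (List Int)) (M : Finset (Int × Int)),
      BInv b V0 s queue group v M →
      queue.length + 26 * (25 - M.card) < fuel →
      (bfsLoop b fuel queue group v).1.length = (compF (vget b) s).card ∧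
      VS (bfsLoop b fuel queue group v).2 = V0 ∪ compF (vget b) s ∧
      wf5 (bfsLoop b fuel queue group v).2 := by
  intro fuel
  induction fuel with
  | zero => intro queue group v M hInv hm; omega
  | succ fuel ih =>
    intro queue group v M hInv hm
    obtain ⟨hwf, hVS, hM, hsM, hgn, hgt, hqM, hfront⟩ := hInv
    rcases queue with _ | ⟨⟨cx, cy⟩, rest⟩
    · have hred : bfsLoop b (fuel + 1) [] group v = (group, v) := rfl
      rw [hred]
      have hMeq : M = compF (vget b) s :=
        closed_eq_compF b V0 s v M hs hdisj hVS hM hsM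
          (fun p hp z hz => hfront p hp (by simp) z hz)
      refine ⟨?_, ?_, hwf⟩
      · show group.length = _
        rw [← hMeq, ← hgt, List.toFinset_card_of_nodup hgn]
      · show VS v = _
        rw [hVS, hMeq]
    · rw [bfsLoop_succ]
      have hcM : (cx, cy) ∈ M := hqM _ (by simp)
      have hc : (cx, cy) ∈ compF (vget b) s := hM hcM
      obtain ⟨a1, M1, he1, hM1eq, hwf1, hVS1, hMc1, hgn1, hcov1, hmono1, hlen1⟩ :=
        bfsNb_spec b V0 s cx cy (cx + (-1)) (cy + 0) rest group v M hs hc (by omega)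
          hwf hVS hM hgn hgt
      set v1 := (bfsNb b cx cy (rest, group, v) (cx + (-1)) (cy + 0)).2.2 with hv1
      rw [he1]
      have hgt1 : (group ++ a1).toFinset = M1 := by
        rw [List.toFinset_append, hgt, hM1eq]
      obtain ⟨a2, M2, he2, hM2eq, hwf2, hVS2, hMc2, hgn2, hcov2, hmono2, hlen2⟩ :=
        bfsNb_spec b V0 s cx cy (cx + 0) (cy + 1) (rest ++ a1) (group ++ a1) v1 M1 hs hc
          (by omega) hwf1 hVS1 hMc1 hgn1 hgt1
      set v2 := (bfsNb b cx cy (rest ++ a1, group ++ a1, v1) (cx + 0) (cy + 1)).2.2 with hv2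
      rw [he2]
      have hgt2 : (group ++ a1 ++ a2).toFinset = M2 := by
        rw [List.toFinset_append, hgt1, hM2eq]
      obtain ⟨a3, M3, he3, hM3eq, hwf3, hVS3, hMc3, hgn3, hcov3, hmono3, hlen3⟩ :=
        bfsNb_spec b V0 s cx cy (cx + 1) (cy + 0) (rest ++ a1 ++ a2) (group ++ a1 ++ a2) v2 M2
          hs hc (by omega) hwf2 hVS2 hMc2 hgn2 hgt2
      set v3 := (bfsNb b cx cy (rest ++ a1 ++ a2, group ++ a1 ++ a2, v2) (cx + 1) (cy + 0)).2.2
        with hv3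
      rw [he3]
      have hgt3 : (group ++ a1 ++ a2 ++ a3).toFinset = M3 := by
        rw [List.toFinset_append, hgt2, hM3eq]
      obtain ⟨a4, M4, he4, hM4eq, hwf4, hVS4, hMc4, hgn4, hcov4, hmono4, hlen4⟩ :=
        bfsNb_spec b V0 s cx cy (cx + 0) (cy + (-1)) (rest ++ a1 ++ a2 ++ a3)
          (group ++ a1 ++ a2 ++ a3) v3 M3 hs hc (by omega) hwf3 hVS3 hMc3 hgn3 hgt3
      set v4 := (bfsNb b cx cy (rest ++ a1 ++ a2 ++ a3, group ++ a1 ++ a2 ++ a3, v3)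
        (cx + 0) (cy + (-1))).2.2 with hv4
      rw [he4]
      have hgt4 : (group ++ a1 ++ a2 ++ a3 ++ a4).toFinset = M4 := by
        rw [List.toFinset_append, hgt3, hM4eq]
      -- M grows along the steps
      have hsub1 : M ⊆ M1 := by rw [hM1eq]; exact Finset.subset_union_left
      have hsub2 : M1 ⊆ M2 := by rw [hM2eq]; exact Finset.subset_union_left
      have hsub3 : M2 ⊆ M3 := by rw [hM3eq]; exact Finset.subset_union_left
      have hsub4 : M3 ⊆ M4 := by rw [hM4eq]; exact Finset.subset_union_left
      have hmono12 : VS v1 ⊆ VS v4 :=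
        (hmono2.trans hmono3).trans hmono4
      have hmono22 : VS v2 ⊆ VS v4 := hmono3.trans hmono4
      -- queue membership in M4
      have hq4 : ∀ p ∈ rest ++ a1 ++ a2 ++ a3 ++ a4, p ∈ M4 := by
        intro p hp
        rcases List.mem_append.1 hp with hp | hp
        · rcases List.mem_append.1 hp with hp | hp
          · rcases List.mem_append.1 hp with hp | hp
            · rcases List.mem_append.1 hp with hp | hp
              · exact hsub4 (hsub3 (hsub2 (hsub1 (hqM p (List.mem_cons_of_mem _ hp)))))
              · exact hsub4 (hsub3 (hsub2 (hM1eq ▸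
                  Finset.mem_union_right M (List.mem_toFinset.2 hp))))
            · exact hsub4 (hsub3 (hM2eq ▸ Finset.mem_union_right M1 (List.mem_toFinset.2 hp)))
          · exact hsub4 (hM3eq ▸ Finset.mem_union_right M2 (List.mem_toFinset.2 hp))
        · exact hM4eq ▸ Finset.mem_union_right M3 (List.mem_toFinset.2 hp)
      -- frontier for the new state
      have hfront4 : ∀ p ∈ M4, p ∉ rest ++ a1 ++ a2 ++ a3 ++ a4 →
          ∀ z, adjB (vget b) p z = true → z ∈ VS v4 := by
        intro p hp hpq z hz
        by_cases hpc : p = (cx, cy)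
        · subst hpc
          obtain ⟨z1, z2⟩ := z
          rcases adjB_neighbors (vget b) (cx, cy) (z1, z2) hz with hcase | hcase | hcase | hcase
          · have hzz : (z1, z2) = (cx + (-1), cy + 0) := by
              simp only [Prod.mk.injEq]
              simp only at hcase
              omega
            rw [hzz] at hz ⊢
            exact hmono12 (hcov1 hz)
          · have hzz : (z1, z2) = (cx + 1, cy + 0) := by
              simp only [Prod.mk.injEq]
              simp only at hcase
              omega
            rw [hzz] at hz ⊢
            exact hmono4 (hcov3 hz)
          · have hzz : (z1, z2) = (cx + 0, cy + 1) := by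
              simp only [Prod.mk.injEq]
              simp only at hcase
              omega
            rw [hzz] at hz ⊢
            exact hmono22 (hcov2 hz)
          · have hzz : (z1, z2) = (cx + 0, cy + (-1)) := by
              simp only [Prod.mk.injEq]
              simp only at hcase
              omega
            rw [hzz] at hz ⊢
            exact hcov4 hz
        · -- p is an old or freshly queued cell
          have hnotq : ∀ l : List (Int × Int), p ∈ l →
              (l = a1 ∨ l = a2 ∨ l = a3 ∨ l = a4) → False := by
            intro l hpl hl
            apply hpq
            rcases hl with rfl | rfl | rfl | rfl
            · exact List.mem_append_left _ (List.mem_append_left _ (List.mem_append_left _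
                (List.mem_append_right _ hpl)))
            · exact List.mem_append_left _ (List.mem_append_left _ (List.mem_append_right _ hpl))
            · exact List.mem_append_left _ (List.mem_append_right _ hpl)
            · exact List.mem_append_right _ hpl
          have hpM : p ∈ M := by
            rw [hM4eq] at hp
            rcases Finset.mem_union.1 hp with hp | hp
            · rw [hM3eq] at hp
              rcases Finset.mem_union.1 hp with hp | hp
              · rw [hM2eq] at hp
                rcases Finset.mem_union.1 hp with hp | hp
                · rw [hM1eq] at hp
                  rcases Finset.mem_union.1 hp with hp | hp
                  · exact hp
                  · exact (hnotq a1 (List.mem_toFinset.1 hp) (Or.inl rfl)).elim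
                · exact (hnotq a2 (List.mem_toFinset.1 hp) (Or.inr (Or.inl rfl))).elim
              · exact (hnotq a3 (List.mem_toFinset.1 hp) (Or.inr (Or.inr (Or.inl rfl)))).elim
            · exact (hnotq a4 (List.mem_toFinset.1 hp) (Or.inr (Or.inr (Or.inr rfl)))).elim
          have hprest : p ∉ rest := fun hmem => hpq (List.mem_append_left _
            (List.mem_append_left _ (List.mem_append_left _ (List.mem_append_left _ hmem))))
          have hpold : p ∉ (cx, cy) :: rest := by
            intro hmem
            rcases List.mem_cons.1 hmem with h | h
            · exact hpc h
            · exact hprest h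
          exact ((hmono1.trans hmono2).trans (hmono3.trans hmono4))
            (hfront p hpM hpold z hz)
      -- measure decreases
      have hcard4 : M4.card ≤ 25 := by
        have h1 := Finset.card_le_card (hMc4.trans (compF_subset_grid (vget b) s hs))
        rwa [card_gridF] at h1
      exact ih (rest ++ a1 ++ a2 ++ a3 ++ a4) (group ++ a1 ++ a2 ++ a3 ++ a4) v4 M4
        ⟨hwf4, hVS4, hMc4, hsub4 (hsub3 (hsub2 (hsub1 hsM))), hgn4, hgt4, hq4, hfront4⟩
        (by
          simp only [List.length_cons] at hm
          simp only [List.length_append] at hlen1 hlen2 hlen3 hlen4 ⊢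
          omega)


-- ---- A's scorer equals the abstract score ----

def calcBody (b : List (List Int)) (st : Int × List (List Int)) (p : Int × Int) :
    Int × List (List Int) :=
  if vget st.2 p.1 p.2 == 0 then
    ((if 3 ≤ ((bfsA p.1 p.2 b st.2).1.length : Int) then st.1 + ((bfsA p.1 p.2 b st.2).1.length : Int)
      else st.1), (bfsA p.1 p.2 b st.2).2)
  else st

theorem foldl_nested {α : Type} (F : α → (Int × Int) → α) (init : α) :
    (PySem.List.pyRange 0 5 1).foldl (fun st i =>
      (PySem.List.pyRange 0 5 1).foldl (fun st j => F st (i, j)) st) init =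
    gridL.foldl F init := by
  rfl

theorem calc_flat (b : List (List Int)) :
    calcInitValue b = (gridL.foldl (calcBody b) ((0 : Int), visit0)).1 :=
  congrArg Prod.fst (foldl_nested (calcBody b) ((0 : Int), visit0))

def Ucomps (b : List (List Int)) (done : List (Int × Int)) : Finset (Int × Int) :=
  done.foldr (fun p S => compF (vget b) p ∪ S) ∅

theorem Ucomps_base (b : List (List Int)) (done : List (Int × Int)) (X : Finset (Int × Int)) :
    done.foldr (fun p S => compF (vget b) p ∪ S) X = Ucomps b done ∪ X := by
  induction done with
  | nil => simp [Ucomps]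
  | cons p rest ih => simp [Ucomps, List.foldr_cons, ih, Finset.union_assoc]

theorem Ucomps_append (b : List (List Int)) (done : List (Int × Int)) (c : Int × Int) :
    Ucomps b (done ++ [c]) = Ucomps b done ∪ compF (vget b) c := by
  rw [Ucomps, List.foldr_append, List.foldr_cons, List.foldr_nil, Ucomps_base]
  rw [Finset.union_empty]

theorem compF_subset_Ucomps (b : List (List Int)) (done : List (Int × Int)) (p : Int × Int)
    (hp : p ∈ done) : compF (vget b) p ⊆ Ucomps b done := by
  induction done with
  | nil => cases hp
  | cons r rest ih =>
      rcases List.mem_cons.1 hp with rfl | hp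
      · exact Finset.subset_union_left
      · exact (ih hp).trans Finset.subset_union_right

theorem mem_Ucomps_elim (b : List (List Int)) (done : List (Int × Int)) (z : Int × Int)
    (hz : z ∈ Ucomps b done) : ∃ p ∈ done, z ∈ compF (vget b) p := by
  induction done with
  | nil => cases hz
  | cons r rest ih =>
      rcases Finset.mem_union.1 hz with h | h
      · exact ⟨r, List.mem_cons_self, h⟩
      · obtain ⟨p, hp, hzp⟩ := ih h
        exact ⟨p, List.mem_cons_of_mem _ hp, hzp⟩

theorem compF_subset_Ucomps_of_mem (b : List (List Int)) (done : List (Int × Int)) (c : Int × Int)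
    (hdG : ∀ p ∈ done, inGb p = true) (hc : c ∈ Ucomps b done) :
    compF (vget b) c ⊆ Ucomps b done := by
  obtain ⟨p, hp, hcp⟩ := mem_Ucomps_elim b done c hc
  have heq : compF (vget b) p = compF (vget b) c := compF_eq_of_mem _ _ _ (hdG p hp) hcp
  rw [← heq]
  exact compF_subset_Ucomps b done p hp

theorem Ucomps_disjoint (b : List (List Int)) (done : List (Int × Int)) (c : Int × Int)
    (hdG : ∀ p ∈ done, inGb p = true) (hcG : inGb c = true) (hcn : c ∉ Ucomps b done) :
    ∀ z ∈ Ucomps b done, z ∉ compF (vget b) c := by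
  intro z hz hzc
  obtain ⟨p, hp, hzp⟩ := mem_Ucomps_elim b done z hz
  have hpG := hdG p hp
  have h1 : compF (vget b) p = compF (vget b) z := compF_eq_of_mem _ _ _ hpG hzp
  have h2 : compF (vget b) c = compF (vget b) z := compF_eq_of_mem _ _ _ hcG hzc
  apply hcn
  have hcz : c ∈ compF (vget b) z := by
    rw [← h2]; exact mem_compF_self _ _
  rw [← h1] at hcz
  exact compF_subset_Ucomps b done p hp hcz


theorem Ucomps_gridL (b : List (List Int)) : Ucomps b gridL = gridF := by
  apply Finset.Subset.antisymm
  · intro z hz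
    obtain ⟨p, hp, hzp⟩ := mem_Ucomps_elim b gridL z hz
    exact compF_subset_grid (vget b) p ((mem_gridL p).1 hp) hzp
  · intro q hq
    have hqL : q ∈ gridL := (mem_gridL q).2 ((mem_gridF q).1 hq)
    exact compF_subset_Ucomps b gridL q hqL (mem_compF_self _ q)

theorem calcFold_run (b : List (List Int)) :
    ∀ (todo done : List (Int × Int)), gridL = done ++ todo →
      ∀ (acc : Int) (v : List (List Int)), wf5 v → VS v = Ucomps b done →
        acc = ((VS v ∩ bigSet (vget b)).card : Int) →
        (todo.foldl (calcBody b) (acc, v)).1 =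
          ((Ucomps b gridL ∩ bigSet (vget b)).card : Int) := by
  intro todo
  induction todo with
  | nil =>
      intro done hsplit acc v hwf hVS hacc
      rw [List.append_nil] at hsplit
      simp only [List.foldl_nil]
      rw [hacc, hVS, ← hsplit]
  | cons c todo' ih =>
      intro done hsplit acc v hwf hVS hacc
      have hcG : inGb c = true := by
        have hm : c ∈ gridL := by
          rw [hsplit]; exact List.mem_append_right _ List.mem_cons_self
        exact (mem_gridL c).1 hm
      have hdG : ∀ p ∈ done, inGb p = true := by
        intro p hp
        have hm : p ∈ gridL := by rw [hsplit]; exact List.mem_append_left _ hp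
        exact (mem_gridL p).1 hm
      have hsplit' : gridL = (done ++ [c]) ++ todo' := by
        rw [hsplit, List.append_assoc]; rfl
      simp only [List.foldl_cons]
      by_cases hv : vget v c.1 c.2 = 0
      · -- c is unvisited: the BFS explores its whole component
        have hcn : c ∉ VS v := fun hmem => ((mem_VS v c).1 hmem).2 hv
        have hdisj : ∀ z ∈ VS v, z ∉ compF (vget b) c := by
          intro z hz
          rw [hVS] at hz
          rw [hVS] at hcn
          exact Ucomps_disjoint b done c hdG hcG hcn z hz
        obtain ⟨hb1, hb2, hb3, hb4⟩ := (inGb_iff c).1 hcG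
        have hBInv : BInv b (VS v) c [(c.1, c.2)] [(c.1, c.2)] (vset v c.1 c.2 1) {c} := by
          refine ⟨wf5_vset v c.1 c.2 1 hwf hb1 hb2 hb3 hb4, ?_, ?_,
            Finset.mem_singleton_self c, List.nodup_singleton _, ?_, ?_, ?_⟩
          · rw [VS_vset_one v c.1 c.2 hwf (by simpa using hcG), Finset.union_singleton]
          · rw [Finset.singleton_subset_iff]
            exact mem_compF_self _ _
          · simp
          · intro p hp
            rw [List.mem_singleton] at hp
            simp [hp]
          · intro p hp hpq
            rw [Finset.mem_singleton] at hp
            exact absurd (by simp [hp]) hpq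
        have hrun := bfsLoop_run b (VS v) c hcG hdisj 1000 [(c.1, c.2)] [(c.1, c.2)]
          (vset v c.1 c.2 1) {c} hBInv (by norm_num)
        have hreq : bfsA c.1 c.2 b v =
            bfsLoop b 1000 [(c.1, c.2)] [(c.1, c.2)] (vset v c.1 c.2 1) := rfl
        rw [← hreq] at hrun
        obtain ⟨hlen, hVS', hwf'⟩ := hrun
        have hbody : calcBody b (acc, v) c =
            ((if 3 ≤ (((bfsA c.1 c.2 b v).1.length : Int)) then
                acc + ((bfsA c.1 c.2 b v).1.length : Int) else acc), (bfsA c.1 c.2 b v).2) := by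
          simp only [calcBody, hv]
          rfl
        rw [hbody]
        -- big-component bookkeeping
        have hCsubBig : 3 ≤ (compF (vget b) c).card → compF (vget b) c ⊆ bigSet (vget b) := by
          intro h3 q hq
          have hqG : q ∈ gridF := compF_subset_grid _ c hcG hq
          have heq : compF (vget b) q = compF (vget b) c := (compF_eq_of_mem _ c q hcG hq).symm
          exact Finset.mem_filter.2 ⟨hqG, by rw [heq]; exact h3⟩
        have hCnotBig : (compF (vget b) c).card < 3 →
            compF (vget b) c ∩ bigSet (vget b) = ∅ := by
          intro h3
          ext q
          simp only [Finset.mem_inter, bigSet, Finset.mem_filter, Finset.notMem_empty, iff_false]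
          rintro ⟨hq, _, hbig⟩
          have heq : compF (vget b) q = compF (vget b) c := (compF_eq_of_mem _ c q hcG hq).symm
          rw [heq] at hbig
          omega
        have hdisj2 : Disjoint (VS v ∩ bigSet (vget b)) (compF (vget b) c ∩ bigSet (vget b)) := by
          rw [Finset.disjoint_left]
          intro q hq1 hq2
          exact hdisj q (Finset.mem_inter.1 hq1).1 (Finset.mem_inter.1 hq2).1
        have hcardUnion : ((VS v ∪ compF (vget b) c) ∩ bigSet (vget b)).card =
            (VS v ∩ bigSet (vget b)).card + (compF (vget b) c ∩ bigSet (vget b)).card := by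
          rw [Finset.union_inter_distrib_right, Finset.card_union_of_disjoint hdisj2]
        apply ih (done ++ [c]) hsplit' _ _ hwf'
        · rw [hVS', hVS, Ucomps_append]
        · rw [hVS', hcardUnion]
          by_cases h3 : 3 ≤ (compF (vget b) c).card
          · rw [if_pos (by rw [hlen]; exact_mod_cast h3)]
            rw [Finset.inter_eq_left.2 (hCsubBig h3), hacc, hlen]
            push_cast
            ring
          · rw [if_neg (by rw [hlen]; intro hcon; exact h3 (by exact_mod_cast hcon))]
            rw [hCnotBig (by omega), hacc]
            simp
      · -- c was already visited: nothing changes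
        have hbody : calcBody b (acc, v) c = (acc, v) := by
          simp only [calcBody]
          rw [if_neg (by simpa using hv)]
        rw [hbody]
        apply ih (done ++ [c]) hsplit' acc v hwf ?_ hacc
        have hcVS : c ∈ VS v := (mem_VS v c).2 ⟨hcG, hv⟩
        rw [hVS] at hcVS
        rw [Ucomps_append, hVS,
          Finset.union_eq_left.2 (compF_subset_Ucomps_of_mem b done c hdG hcVS)]

theorem calcA_eq (b : List (List Int)) : calcInitValue b = scoreSpec (vget b) := by
  rw [calc_flat]
  have h0 : VS visit0 = Ucomps b [] := by rw [VS_visit0]; rfl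
  have hacc : (0 : Int) = ((VS visit0 ∩ bigSet (vget b)).card : Int) := by
    rw [VS_visit0]; simp
  have hmain := calcFold_run b gridL [] rfl 0 visit0 wf5_visit0 h0 hacc
  have hfinal : gridF ∩ bigSet (vget b) = bigSet (vget b) :=
    Finset.inter_eq_right.2 (Finset.filter_subset _ _)
  rw [Ucomps_gridL, hfinal] at hmain
  exact hmain.trans rfl


-- ---- B's frontier step over PySem.Set ----

def bcond (b : List (List Int)) (p q : Int × Int) : Bool :=
  decide (0 ≤ q.1) && decide (q.1 < 5) && decide (0 ≤ q.2) && decide (q.2 < 5)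
    && (vget b q.1 q.2 == vget b p.1 p.2)

def condAdd {α : Type} [BEq α] (c : α → Bool) (acc : PySem.Set α) (q : α) : PySem.Set α :=
  if c q then PySem.Set.add acc q else acc

def nbrStep (b : List (List Int)) (acc : PySem.Set (Int × Int)) (p : Int × Int) :
    PySem.Set (Int × Int) :=
  (nbrsB p.1 p.2).foldl (condAdd (bcond b p)) acc

theorem bStep_eq (b : List (List Int)) (S : PySem.Set (Int × Int)) :
    bStep b S = S.foldl (nbrStep b) S := rfl

theorem bcond_iff (b : List (List Int)) (p z : Int × Int) :
    bcond b p z = true ↔ inGb z = true ∧ vget b z.1 z.2 = vget b p.1 p.2 := by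
  simp [bcond, inGb, and_assoc]

theorem set_add_prefix {α : Type} [BEq α] (A : PySem.Set α) (q : α) :
    ∃ t, PySem.Set.add A q = A ++ t := by
  rw [PySem.Set.add]
  split
  · exact ⟨[], by simp⟩
  · exact ⟨[q], rfl⟩

theorem foldl_condAdd_prefix {α : Type} [BEq α] (c : α → Bool) (l : List α) (A : PySem.Set α) :
    ∃ t, l.foldl (condAdd c) A = A ++ t := by
  induction l generalizing A with
  | nil => exact ⟨[], by simp⟩
  | cons q rest ih =>
      rw [List.foldl_cons]
      rcases (by
        rw [condAdd]
        split
        · exact set_add_prefix A q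
        · exact ⟨[], by simp⟩ : ∃ t0, condAdd c A q = A ++ t0) with ⟨t0, ht0⟩
      obtain ⟨t1, ht1⟩ := ih (condAdd c A q)
      exact ⟨t0 ++ t1, by rw [ht1, ht0, List.append_assoc]⟩

theorem foldl_condAdd_mem {α : Type} [BEq α] [LawfulBEq α] (c : α → Bool) (l : List α)
    (A : PySem.Set α) (z : α) :
    z ∈ l.foldl (condAdd c) A ↔ z ∈ A ∨ (z ∈ l ∧ c z = true) := by
  induction l generalizing A with
  | nil => simp
  | cons q rest ih =>
      rw [List.foldl_cons, ih]
      by_cases hc : c q = true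
      · rw [condAdd, if_pos hc]
        rw [show (z ∈ PySem.Set.add A q ↔ z ∈ A ∨ z = q) from PySem.Set.mem_add A q z]
        constructor
        · rintro ((h | rfl) | ⟨hm, hcz⟩)
          · exact Or.inl h
          · exact Or.inr ⟨List.mem_cons_self, hc⟩
          · exact Or.inr ⟨List.mem_cons_of_mem _ hm, hcz⟩
        · rintro (h | ⟨hm, hcz⟩)
          · exact Or.inl (Or.inl h)
          · rcases List.mem_cons.1 hm with rfl | hm
            · exact Or.inl (Or.inr rfl)
            · exact Or.inr ⟨hm, hcz⟩
      · rw [condAdd, if_neg hc]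
        constructor
        · rintro (h | ⟨hm, hcz⟩)
          · exact Or.inl h
          · exact Or.inr ⟨List.mem_cons_of_mem _ hm, hcz⟩
        · rintro (h | ⟨hm, hcz⟩)
          · exact Or.inl h
          · rcases List.mem_cons.1 hm with rfl | hm
            · exact absurd hcz hc
            · exact Or.inr ⟨hm, hcz⟩

theorem foldl_condAdd_nodup {α : Type} [BEq α] [LawfulBEq α] (c : α → Bool) (l : List α)
    (A : PySem.Set α) (hA : A.Nodup) : (l.foldl (condAdd c) A).Nodup := by
  induction l generalizing A with
  | nil => exact hA
  | cons q rest ih =>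
      rw [List.foldl_cons]
      apply ih
      rw [condAdd]
      split
      · exact PySem.Set.nodup_add A q hA
      · exact hA

theorem foldl_nbrStep_mem (b : List (List Int)) (L : List (Int × Int))
    (A : PySem.Set (Int × Int)) (z : Int × Int) :
    z ∈ L.foldl (nbrStep b) A ↔
      z ∈ A ∨ ∃ p ∈ L, z ∈ nbrsB p.1 p.2 ∧ bcond b p z = true := by
  induction L generalizing A with
  | nil => simp
  | cons p rest ih =>
      rw [List.foldl_cons, ih]
      rw [show (nbrStep b A p) = (nbrsB p.1 p.2).foldl (condAdd (bcond b p)) A from rfl]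
      rw [foldl_condAdd_mem]
      constructor
      · rintro ((h | ⟨hm, hcz⟩) | ⟨r, hr, hm, hcz⟩)
        · exact Or.inl h
        · exact Or.inr ⟨p, List.mem_cons_self, hm, hcz⟩
        · exact Or.inr ⟨r, List.mem_cons_of_mem _ hr, hm, hcz⟩
      · rintro (h | ⟨r, hr, hm, hcz⟩)
        · exact Or.inl (Or.inl h)
        · rcases List.mem_cons.1 hr with rfl | hr
          · exact Or.inl (Or.inr ⟨hm, hcz⟩)
          · exact Or.inr ⟨r, hr, hm, hcz⟩

theorem foldl_nbrStep_nodup (b : List (List Int)) (L : List (Int × Int))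
    (A : PySem.Set (Int × Int)) (hA : A.Nodup) : (L.foldl (nbrStep b) A).Nodup := by
  induction L generalizing A with
  | nil => exact hA
  | cons p rest ih =>
      rw [List.foldl_cons]
      exact ih _ (foldl_condAdd_nodup _ _ _ hA)

theorem foldl_nbrStep_prefix (b : List (List Int)) (L : List (Int × Int))
    (A : PySem.Set (Int × Int)) : ∃ t, L.foldl (nbrStep b) A = A ++ t := by
  induction L generalizing A with
  | nil => exact ⟨[], by simp⟩
  | cons p rest ih =>
      rw [List.foldl_cons]
      obtain ⟨t0, ht0⟩ := foldl_condAdd_prefix (bcond b p) (nbrsB p.1 p.2) A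
      obtain ⟨t1, ht1⟩ := ih (nbrStep b A p)
      refine ⟨t0 ++ t1, ?_⟩
      rw [ht1, show nbrStep b A p = A ++ t0 from ht0, List.append_assoc]

theorem mem_nbrsB_iff (p z : Int × Int) :
    z ∈ nbrsB p.1 p.2 ↔ (p.1 - z.1).natAbs + (p.2 - z.2).natAbs = 1 := by
  obtain ⟨a, c⟩ := p
  obtain ⟨z1, z2⟩ := z
  simp only [nbrsB, List.mem_cons, List.not_mem_nil, or_false, Prod.mk.injEq]
  omega

theorem bStep_toFinset (b : List (List Int)) (S : PySem.Set (Int × Int))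
    (hsub : S.toFinset ⊆ gridF) :
    (bStep b S).toFinset = cstepF (vget b) S.toFinset := by
  rw [bStep_eq]
  ext z
  rw [List.mem_toFinset, foldl_nbrStep_mem]
  rw [cstepF, Finset.mem_union, Finset.mem_filter, List.mem_toFinset]
  constructor
  · rintro (h | ⟨p, hp, hm, hcz⟩)
    · exact Or.inl h
    · right
      obtain ⟨hzG, hval⟩ := (bcond_iff b p z).1 hcz
      have hpG : inGb p = true := (mem_gridF p).1 (hsub (List.mem_toFinset.2 hp))
      refine ⟨(mem_gridF z).2 hzG, p, List.mem_toFinset.2 hp, ?_⟩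
      simp only [adjB, Bool.and_eq_true, beq_iff_eq]
      exact ⟨⟨⟨hpG, hzG⟩, by simpa using (mem_nbrsB_iff p z).1 hm⟩, hval.symm⟩
  · rintro (h | ⟨hzG, p, hp, hadj⟩)
    · exact Or.inl h
    · right
      simp only [adjB, Bool.and_eq_true, beq_iff_eq] at hadj
      refine ⟨p, List.mem_toFinset.1 hp, (mem_nbrsB_iff p z).2 (by simpa using hadj.1.2), ?_⟩
      exact (bcond_iff b p z).2 ⟨hadj.1.1.2, hadj.2.symm⟩


-- ---- B's fixpoint closure computes the component ----

theorem bClosure_step (b : List (List Int)) (fuel : Nat) (S : PySem.Set (Int × Int)) :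
    bClosure b (fuel + 1) S =
      if (bStep b S).length = S.length then S else bClosure b fuel (bStep b S) := rfl

theorem iterate_stab (f : Int → Int → Int) (A : Finset (Int × Int)) (k : Nat)
    (hfix : cstepF f ((cstepF f)^[k] A) = (cstepF f)^[k] A) :
    ∀ m, k ≤ m → (cstepF f)^[m] A = (cstepF f)^[k] A := by
  intro m hkm
  obtain ⟨d, rfl⟩ := Nat.exists_eq_add_of_le hkm
  induction d with
  | zero => rfl
  | succ d ih =>
      rw [Nat.add_succ, Function.iterate_succ_apply', ih (by omega), hfix]

theorem bClosure_run (b : List (List Int)) (s : Int × Int) (hs : inGb s = true) :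
    ∀ (fuel k : Nat) (S : PySem.Set (Int × Int)), S.Nodup →
      S.toFinset = (cstepF (vget b))^[k] {s} →
      k + 1 ≤ S.length → 26 ≤ fuel + k →
      (bClosure b fuel S).length = (compF (vget b) s).card := by
  intro fuel
  induction fuel with
  | zero =>
      intro k S hnd hSF hk hfk
      have hsubG : S.toFinset ⊆ gridF := by rw [hSF]; exact iterate_subset_grid _ s hs k
      have hcard : S.toFinset.card ≤ 25 := by
        have h := Finset.card_le_card hsubG; rwa [card_gridF] at h
      rw [List.toFinset_card_of_nodup hnd] at hcard
      omega
  | succ fuel ih =>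
      intro k S hnd hSF hk hfk
      have hsubG : S.toFinset ⊆ gridF := by rw [hSF]; exact iterate_subset_grid _ s hs k
      have hcard : S.toFinset.card ≤ 25 := by
        have h := Finset.card_le_card hsubG; rwa [card_gridF] at h
      have hlencard : S.toFinset.card = S.length := List.toFinset_card_of_nodup hnd
      have hstepF : (bStep b S).toFinset = cstepF (vget b) S.toFinset := bStep_toFinset b S hsubG
      obtain ⟨t, ht⟩ : ∃ t, bStep b S = S ++ t := foldl_nbrStep_prefix b S S
      have hndS : (bStep b S).Nodup := foldl_nbrStep_nodup b S S hnd
      rw [bClosure_step]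
      by_cases hlen : (bStep b S).length = S.length
      · rw [if_pos hlen]
        have ht0 : t = [] := by
          rw [ht, List.length_append] at hlen
          exact List.eq_nil_of_length_eq_zero (by omega)
        have hfix : cstepF (vget b) ((cstepF (vget b))^[k] {s}) = (cstepF (vget b))^[k] {s} := by
          rw [← hSF, ← hstepF, ht, ht0, List.append_nil, hSF]
        have h25 : compF (vget b) s = S.toFinset := by
          rw [compF, iterate_stab (vget b) {s} k hfix 25 (by omega), hSF]
        rw [h25, ← hlencard]
      · rw [if_neg hlen]
        apply ih (k + 1) (bStep b S) hndS
        · rw [hstepF, hSF]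
          exact (Function.iterate_succ_apply' _ _ _).symm
        · rw [ht, List.length_append]
          have hne : t.length ≠ 0 := by
            intro h0
            exact hlen (by rw [ht, List.length_append, h0]; omega)
          omega
        · omega

theorem closure_single (b : List (List Int)) (c : Int × Int) (hc : inGb c = true) :
    (bClosure b 26 (PySem.Set.ofList [c])).length = (compF (vget b) c).card := by
  have hof : PySem.Set.ofList [c] = [c] := rfl
  apply bClosure_run b c hc 26 0 (PySem.Set.ofList [c])
  · rw [hof]; exact List.nodup_singleton c
  · rw [hof]; simp
  · rw [hof]; simp
  · omega

-- ---- B's scorer equals the abstract score ----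

def scoreBody (b : List (List Int)) (tot : Int) (p : Int × Int) : Int :=
  if 3 ≤ (bClosure b 26 (PySem.Set.ofList [p])).length then tot + 1 else tot

theorem scoreB_flat (b : List (List Int)) : scoreB b = gridL.foldl (scoreBody b) 0 :=
  foldl_nested (scoreBody b) 0

theorem scoreB_run (b : List (List Int)) :
    ∀ (todo done : List (Int × Int)), gridL = done ++ todo →
      ∀ tot : Int, tot = ((done.toFinset ∩ bigSet (vget b)).card : Int) →
      todo.foldl (scoreBody b) tot = ((gridL.toFinset ∩ bigSet (vget b)).card : Int) := by
  intro todo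
  induction todo with
  | nil =>
      intro done hsplit tot htot
      rw [List.append_nil] at hsplit
      rw [List.foldl_nil, htot, ← hsplit]
  | cons c todo' ih =>
      intro done hsplit tot htot
      have hcL : c ∈ gridL := by
        rw [hsplit]; exact List.mem_append_right _ List.mem_cons_self
      have hcG : inGb c = true := (mem_gridL c).1 hcL
      have hcd : c ∉ done := by
        intro hcdone
        have hnd := nodup_gridL
        rw [hsplit, List.nodup_append] at hnd
        exact hnd.2.2 c hcdone c List.mem_cons_self rfl
      have hsplit' : gridL = (done ++ [c]) ++ todo' := by
        rw [hsplit, List.append_assoc]; rfl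
      rw [List.foldl_cons]
      by_cases hbig : 3 ≤ (compF (vget b) c).card
      · have hcbig : c ∈ bigSet (vget b) := Finset.mem_filter.2 ⟨(mem_gridF c).2 hcG, hbig⟩
        rw [show scoreBody b tot c = tot + 1 from by
          rw [scoreBody, closure_single b c hcG, if_pos hbig]]
        apply ih (done ++ [c]) hsplit'
        rw [htot, List.toFinset_append]
        rw [show ([c] : List (Int × Int)).toFinset = {c} from rfl]
        rw [Finset.union_inter_distrib_right,
          Finset.inter_eq_left.2 (Finset.singleton_subset_iff.2 hcbig)]
        rw [Finset.union_singleton,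
          Finset.card_insert_of_notMem (fun h => hcd (List.mem_toFinset.1 (Finset.mem_inter.1 h).1))]
        push_cast
        ring
      · rw [show scoreBody b tot c = tot from by
          rw [scoreBody, closure_single b c hcG, if_neg hbig]]
        apply ih (done ++ [c]) hsplit'
        rw [htot, List.toFinset_append]
        rw [show ([c] : List (Int × Int)).toFinset = {c} from rfl]
        rw [Finset.union_inter_distrib_right]
        rw [show ({c} : Finset (Int × Int)) ∩ bigSet (vget b) = ∅ from by
          rw [Finset.singleton_inter_of_notMem]
          intro hmem
          exact hbig (Finset.mem_filter.1 hmem).2]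
        rw [Finset.union_empty]

theorem scoreB_eq (b : List (List Int)) : scoreB b = scoreSpec (vget b) := by
  rw [scoreB_flat]
  have h := scoreB_run b gridL [] rfl 0 (by simp)
  have hfin : gridF ∩ bigSet (vget b) = bigSet (vget b) :=
    Finset.inter_eq_right.2 (Finset.filter_subset _ _)
  rw [show gridL.toFinset = gridF from rfl, hfin] at h
  exact h.trans rfl


-- ---- rotation characterization ----

theorem rot90A_expand (lx ly : Int) (b : List (List Int)) :
    rot90A lx ly b = (vset (vset (vset (vset (vset (vset (vset (vset (vset b (lx + 0) (ly + 2 - 0) (vget b (lx + 0) (ly + 0))) (lx + 1) (ly + 2 - 0) (vget b (lx + 0) (ly + 1))) (lx + 2) (ly + 2 - 0) (vget b (lx + 0) (ly + 2))) (lx + 0) (ly + 2 - 1) (vget b (lx + 1) (ly + 0))) (lx + 1) (ly + 2 - 1) (vget b (lx + 1) (ly + 1))) (lx + 2) (ly + 2 - 1) (vget b (lx + 1) (ly + 2))) (lx + 0) (ly + 2 - 2) (vget b (lx + 2) (ly + 0))) (lx + 1) (ly + 2 - 2) (vget b (lx + 2) (ly + 1))) (lx + 2) (ly + 2 - 2)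 (vget b (lx + 2) (ly + 2))) := rfl

theorem vget_rot90A (lx ly : Int) (b : List (List Int)) (hwf : wf5 b)
    (hlx0 : 0 ≤ lx) (hlx1 : lx ≤ 2) (hly0 : 0 ≤ ly) (hly1 : ly ≤ 2)
    (x y : Int) (hx0 : 0 ≤ x) (hx1 : x < 5) (hy0 : 0 ≤ y) (hy1 : y < 5) :
    vget (rot90A lx ly b) x y =
      if lx ≤ x ∧ x < lx + 3 ∧ ly ≤ y ∧ y < ly + 3 then
        vget b (lx + (ly + 2 - y)) (ly + (x - lx))
      else vget b x y := by
  have hw1 : wf5 (vset b (lx + 0) (ly + 2 - 0) (vget b (lx + 0) (ly + 0))) :=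
    wf5_vset _ _ _ _ hwf (by omega) (by omega) (by omega) (by omega)
  have hw2 : wf5 (vset (vset b (lx + 0) (ly + 2 - 0) (vget b (lx + 0) (ly + 0))) (lx + 1) (ly + 2 - 0) (vget b (lx + 0) (ly + 1))) :=
    wf5_vset _ _ _ _ hw1 (by omega) (by omega) (by omega) (by omega)
  have hw3 : wf5 (vset (vset (vset b (lx + 0) (ly + 2 - 0) (vget b (lx + 0) (ly + 0))) (lx + 1) (ly + 2 - 0) (vget b (lx + 0) (ly + 1))) (lx + 2) (ly + 2 - 0) (vget b (lx + 0) (ly + 2))) :=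
    wf5_vset _ _ _ _ hw2 (by omega) (by omega) (by omega) (by omega)
  have hw4 : wf5 (vset (vset (vset (vset b (lx + 0) (ly + 2 - 0) (vget b (lx + 0) (ly + 0))) (lx + 1) (ly + 2 - 0) (vget b (lx + 0) (ly + 1))) (lx + 2) (ly + 2 - 0) (vget b (lx + 0) (ly + 2))) (lx + 0) (ly + 2 - 1) (vget b (lx + 1) (ly + 0))) :=
    wf5_vset _ _ _ _ hw3 (by omega) (by omega) (by omega) (by omega)
  have hw5 : wf5 (vset (vset (vset (vset (vset b (lx + 0) (ly + 2 - 0) (vget b (lx + 0) (ly + 0))) (lx + 1) (ly + 2 - 0) (vget b (lx + 0) (ly + 1))) (lx + 2) (ly + 2 - 0) (vget b (lx + 0) (ly + 2))) (lx + 0) (ly + 2 - 1) (vget b (lx + 1) (ly + 0))) (lx + 1) (ly + 2 - 1) (vget b (lx + 1) (ly + 1))) :=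
    wf5_vset _ _ _ _ hw4 (by omega) (by omega) (by omega) (by omega)
  have hw6 : wf5 (vset (vset (vset (vset (vset (vset b (lx + 0) (ly + 2 - 0) (vget b (lx + 0) (ly + 0))) (lx + 1) (ly + 2 - 0) (vget b (lx + 0) (ly + 1))) (lx + 2) (ly + 2 - 0) (vget b (lx + 0) (ly + 2))) (lx + 0) (ly + 2 - 1) (vget b (lx + 1) (ly + 0))) (lx + 1) (ly + 2 - 1) (vget b (lx + 1) (ly + 1))) (lx + 2) (ly + 2 - 1) (vget b (lx + 1) (ly + 2))) :=
    wf5_vset _ _ _ _ hw5 (by omega) (by omega) (by omega) (by omega)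
  have hw7 : wf5 (vset (vset (vset (vset (vset (vset (vset b (lx + 0) (ly + 2 - 0) (vget b (lx + 0) (ly + 0))) (lx + 1) (ly + 2 - 0) (vget b (lx + 0) (ly + 1))) (lx + 2) (ly + 2 - 0) (vget b (lx + 0) (ly + 2))) (lx + 0) (ly + 2 - 1) (vget b (lx + 1) (ly + 0))) (lx + 1) (ly + 2 - 1) (vget b (lx + 1) (ly + 1))) (lx + 2) (ly + 2 - 1) (vget b (lx + 1) (ly + 2))) (lx + 0) (ly + 2 - 2) (vget b (lx + 2) (ly + 0))) :=
    wf5_vset _ _ _ _ hw6 (by omega) (by omega) (by omega) (by omega)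
  have hw8 : wf5 (vset (vset (vset (vset (vset (vset (vset (vset b (lx + 0) (ly + 2 - 0) (vget b (lx + 0) (ly + 0))) (lx + 1) (ly + 2 - 0) (vget b (lx + 0) (ly + 1))) (lx + 2) (ly + 2 - 0) (vget b (lx + 0) (ly + 2))) (lx + 0) (ly + 2 - 1) (vget b (lx + 1) (ly + 0))) (lx + 1) (ly + 2 - 1) (vget b (lx + 1) (ly + 1))) (lx + 2) (ly + 2 - 1) (vget b (lx + 1) (ly + 2))) (lx + 0) (ly + 2 - 2) (vget b (lx + 2) (ly + 0))) (lx + 1) (ly + 2 - 2) (vget b (lx + 2) (ly + 1))) :=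
    wf5_vset _ _ _ _ hw7 (by omega) (by omega) (by omega) (by omega)
  rw [rot90A_expand]
  rw [vget_vset (vset (vset (vset (vset (vset (vset (vset (vset b (lx + 0) (ly + 2 - 0) (vget b (lx + 0) (ly + 0))) (lx + 1) (ly + 2 - 0) (vget b (lx + 0) (ly + 1))) (lx + 2) (ly + 2 - 0) (vget b (lx + 0) (ly + 2))) (lx + 0) (ly + 2 - 1) (vget b (lx + 1) (ly + 0))) (lx + 1) (ly + 2 - 1) (vget b (lx + 1) (ly + 1))) (lx + 2) (ly + 2 - 1) (vget b (lx + 1) (ly + 2))) (lx + 0) (ly + 2 - 2) (vget b (lx + 2) (ly + 0))) (lx + 1) (ly + 2 - 2) (vget b (lx + 2) (ly + 1))) (lx + 2) (ly + 2 - 2) (vget b (lx + 2) (ly + 2)) x y hw8 (by omega) (by omega) (by omega) (by omega) hx0 hx1 hy0 hy1]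
  rw [vget_vset (vset (vset (vset (vset (vset (vset (vset b (lx + 0) (ly + 2 - 0) (vget b (lx + 0) (ly + 0))) (lx + 1) (ly + 2 - 0) (vget b (lx + 0) (ly + 1))) (lx + 2) (ly + 2 - 0) (vget b (lx + 0) (ly + 2))) (lx + 0) (ly + 2 - 1) (vget b (lx + 1) (ly + 0))) (lx + 1) (ly + 2 - 1) (vget b (lx + 1) (ly + 1))) (lx + 2) (ly + 2 - 1) (vget b (lx + 1) (ly + 2))) (lx + 0) (ly + 2 - 2) (vget b (lx + 2) (ly + 0))) (lx + 1) (ly + 2 - 2) (vget b (lx + 2) (ly + 1)) x y hw7 (by omega) (by omega) (by omega) (by omega) hx0 hx1 hy0 hy1]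
  rw [vget_vset (vset (vset (vset (vset (vset (vset b (lx + 0) (ly + 2 - 0) (vget b (lx + 0) (ly + 0))) (lx + 1) (ly + 2 - 0) (vget b (lx + 0) (ly + 1))) (lx + 2) (ly + 2 - 0) (vget b (lx + 0) (ly + 2))) (lx + 0) (ly + 2 - 1) (vget b (lx + 1) (ly + 0))) (lx + 1) (ly + 2 - 1) (vget b (lx + 1) (ly + 1))) (lx + 2) (ly + 2 - 1) (vget b (lx + 1) (ly + 2))) (lx + 0) (ly + 2 - 2) (vget b (lx + 2) (ly + 0)) x y hw6 (by omega) (by omega) (by omega) (by omega) hx0 hx1 hy0 hy1]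
  rw [vget_vset (vset (vset (vset (vset (vset b (lx + 0) (ly + 2 - 0) (vget b (lx + 0) (ly + 0))) (lx + 1) (ly + 2 - 0) (vget b (lx + 0) (ly + 1))) (lx + 2) (ly + 2 - 0) (vget b (lx + 0) (ly + 2))) (lx + 0) (ly + 2 - 1) (vget b (lx + 1) (ly + 0))) (lx + 1) (ly + 2 - 1) (vget b (lx + 1) (ly + 1))) (lx + 2) (ly + 2 - 1) (vget b (lx + 1) (ly + 2)) x y hw5 (by omega) (by omega) (by omega) (by omega) hx0 hx1 hy0 hy1]
  rw [vget_vset (vset (vset (vset (vset b (lx + 0) (ly + 2 - 0) (vget b (lx + 0) (ly + 0))) (lx + 1) (ly + 2 - 0) (vget b (lx + 0) (ly + 1))) (lx + 2) (ly + 2 - 0) (vget b (lx + 0) (ly + 2))) (lx + 0) (ly + 2 - 1) (vget b (lx + 1) (ly + 0))) (lx + 1) (ly + 2 - 1) (vget b (lx + 1) (ly + 1)) x y hw4 (by omega) (by omega) (by omega) (by omega) hx0 hx1 hy0 hy1]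
  rw [vget_vset (vset (vset (vset b (lx + 0) (ly + 2 - 0) (vget b (lx + 0) (ly + 0))) (lx + 1) (ly + 2 - 0) (vget b (lx + 0) (ly + 1))) (lx + 2) (ly + 2 - 0) (vget b (lx + 0) (ly + 2))) (lx + 0) (ly + 2 - 1) (vget b (lx + 1) (ly + 0)) x y hw3 (by omega) (by omega) (by omega) (by omega) hx0 hx1 hy0 hy1]
  rw [vget_vset (vset (vset b (lx + 0) (ly + 2 - 0) (vget b (lx + 0) (ly + 0))) (lx + 1) (ly + 2 - 0) (vget b (lx + 0) (ly + 1))) (lx + 2) (ly + 2 - 0) (vget b (lx + 0) (ly + 2)) x y hw2 (by omega) (by omega) (by omega) (by omega) hx0 hx1 hy0 hy1]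
  rw [vget_vset (vset b (lx + 0) (ly + 2 - 0) (vget b (lx + 0) (ly + 0))) (lx + 1) (ly + 2 - 0) (vget b (lx + 0) (ly + 1)) x y hw1 (by omega) (by omega) (by omega) (by omega) hx0 hx1 hy0 hy1]
  rw [vget_vset b (lx + 0) (ly + 2 - 0) (vget b (lx + 0) (ly + 0)) x y hwf (by omega) (by omega) (by omega) (by omega) hx0 hx1 hy0 hy1]
  split_ifs <;> first | rfl | (congr 1 <;> omega)

theorem wf5_rot90A (lx ly : Int) (b : List (List Int)) (hwf : wf5 b)
    (hlx0 : 0 ≤ lx) (hlx1 : lx ≤ 2) (hly0 : 0 ≤ ly) (hly1 : ly ≤ 2) :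
    wf5 (rot90A lx ly b) := by
  have hw1 : wf5 (vset b (lx + 0) (ly + 2 - 0) (vget b (lx + 0) (ly + 0))) :=
    wf5_vset _ _ _ _ hwf (by omega) (by omega) (by omega) (by omega)
  have hw2 : wf5 (vset (vset b (lx + 0) (ly + 2 - 0) (vget b (lx + 0) (ly + 0))) (lx + 1) (ly + 2 - 0) (vget b (lx + 0) (ly + 1))) :=
    wf5_vset _ _ _ _ hw1 (by omega) (by omega) (by omega) (by omega)
  have hw3 : wf5 (vset (vset (vset b (lx + 0) (ly + 2 - 0) (vget b (lx + 0) (ly + 0))) (lx + 1) (ly + 2 - 0) (vget b (lx + 0) (ly + 1))) (lx + 2) (ly + 2 - 0) (vget b (lx + 0) (ly + 2))) :=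
    wf5_vset _ _ _ _ hw2 (by omega) (by omega) (by omega) (by omega)
  have hw4 : wf5 (vset (vset (vset (vset b (lx + 0) (ly + 2 - 0) (vget b (lx + 0) (ly + 0))) (lx + 1) (ly + 2 - 0) (vget b (lx + 0) (ly + 1))) (lx + 2) (ly + 2 - 0) (vget b (lx + 0) (ly + 2))) (lx + 0) (ly + 2 - 1) (vget b (lx + 1) (ly + 0))) :=
    wf5_vset _ _ _ _ hw3 (by omega) (by omega) (by omega) (by omega)
  have hw5 : wf5 (vset (vset (vset (vset (vset b (lx + 0) (ly + 2 - 0) (vget b (lx + 0) (ly + 0))) (lx + 1) (ly + 2 - 0) (vget b (lx + 0) (ly + 1))) (lx + 2) (ly + 2 - 0) (vget b (lx + 0) (ly + 2))) (lx + 0) (ly + 2 - 1) (vget b (lx + 1) (ly + 0))) (lx + 1) (ly + 2 - 1) (vget b (lx + 1) (ly + 1))) :=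
    wf5_vset _ _ _ _ hw4 (by omega) (by omega) (by omega) (by omega)
  have hw6 : wf5 (vset (vset (vset (vset (vset (vset b (lx + 0) (ly + 2 - 0) (vget b (lx + 0) (ly + 0))) (lx + 1) (ly + 2 - 0) (vget b (lx + 0) (ly + 1))) (lx + 2) (ly + 2 - 0) (vget b (lx + 0) (ly + 2))) (lx + 0) (ly + 2 - 1) (vget b (lx + 1) (ly + 0))) (lx + 1) (ly + 2 - 1) (vget b (lx + 1) (ly + 1))) (lx + 2) (ly + 2 - 1) (vget b (lx + 1) (ly + 2))) :=
    wf5_vset _ _ _ _ hw5 (by omega) (by omega) (by omega) (by omega)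
  have hw7 : wf5 (vset (vset (vset (vset (vset (vset (vset b (lx + 0) (ly + 2 - 0) (vget b (lx + 0) (ly + 0))) (lx + 1) (ly + 2 - 0) (vget b (lx + 0) (ly + 1))) (lx + 2) (ly + 2 - 0) (vget b (lx + 0) (ly + 2))) (lx + 0) (ly + 2 - 1) (vget b (lx + 1) (ly + 0))) (lx + 1) (ly + 2 - 1) (vget b (lx + 1) (ly + 1))) (lx + 2) (ly + 2 - 1) (vget b (lx + 1) (ly + 2))) (lx + 0) (ly + 2 - 2) (vget b (lx + 2) (ly + 0))) :=
    wf5_vset _ _ _ _ hw6 (by omega) (by omega) (by omega) (by omega)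
  have hw8 : wf5 (vset (vset (vset (vset (vset (vset (vset (vset b (lx + 0) (ly + 2 - 0) (vget b (lx + 0) (ly + 0))) (lx + 1) (ly + 2 - 0) (vget b (lx + 0) (ly + 1))) (lx + 2) (ly + 2 - 0) (vget b (lx + 0) (ly + 2))) (lx + 0) (ly + 2 - 1) (vget b (lx + 1) (ly + 0))) (lx + 1) (ly + 2 - 1) (vget b (lx + 1) (ly + 1))) (lx + 2) (ly + 2 - 1) (vget b (lx + 1) (ly + 2))) (lx + 0) (ly + 2 - 2) (vget b (lx + 2) (ly + 0))) (lx + 1) (ly + 2 - 2) (vget b (lx + 2) (ly + 1))) :=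
    wf5_vset _ _ _ _ hw7 (by omega) (by omega) (by omega) (by omega)
  have hw9 : wf5 (vset (vset (vset (vset (vset (vset (vset (vset (vset b (lx + 0) (ly + 2 - 0) (vget b (lx + 0) (ly + 0))) (lx + 1) (ly + 2 - 0) (vget b (lx + 0) (ly + 1))) (lx + 2) (ly + 2 - 0) (vget b (lx + 0) (ly + 2))) (lx + 0) (ly + 2 - 1) (vget b (lx + 1) (ly + 0))) (lx + 1) (ly + 2 - 1) (vget b (lx + 1) (ly + 1))) (lx + 2) (ly + 2 - 1) (vget b (lx + 1) (ly + 2))) (lx + 0) (ly + 2 - 2) (vget b (lx + 2) (ly + 0))) (lx + 1) (ly + 2 - 2) (vget b (lx + 2) (ly + 1))) (lx + 2) (ly + 2 - 2) (vget b (lx + 2) (ly + 2))) :=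
    wf5_vset _ _ _ _ hw8 (by omega) (by omega) (by omega) (by omega)
  rw [rot90A_expand]
  exact hw9


theorem rotDegA_90 (lx ly : Int) (b : List (List Int)) :
    rotDegA lx ly 90 b = rot90A lx ly b := by
  have hr : PySem.List.pyRange 0 (PySem.Int.floordiv 90 90) 1 = [0] := by decide
  show (PySem.List.pyRange 0 (PySem.Int.floordiv 90 90) 1).foldl (fun nb _ => rot90A lx ly nb) b = _
  rw [hr]
  rfl

theorem rotDegA_180 (lx ly : Int) (b : List (List Int)) :
    rotDegA lx ly 180 b = rot90A lx ly (rot90A lx ly b) := by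
  have hr : PySem.List.pyRange 0 (PySem.Int.floordiv 180 90) 1 = [0, 1] := by decide
  show (PySem.List.pyRange 0 (PySem.Int.floordiv 180 90) 1).foldl (fun nb _ => rot90A lx ly nb) b = _
  rw [hr]
  simp only [List.foldl_cons, List.foldl_nil]

theorem rotDegA_270 (lx ly : Int) (b : List (List Int)) :
    rotDegA lx ly 270 b = rot90A lx ly (rot90A lx ly (rot90A lx ly b)) := by
  have hr : PySem.List.pyRange 0 (PySem.Int.floordiv 270 90) 1 = [0, 1, 2] := by decide
  show (PySem.List.pyRange 0 (PySem.Int.floordiv 270 90) 1).foldl (fun nb _ => rot90A lx ly nb) b = _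
  rw [hr]
  simp only [List.foldl_cons, List.foldl_nil]

theorem vget_rotatedB (win : List (List Int)) (x0 y0 d : Int) (x y : Int)
    (hx0 : 0 ≤ x) (hx1 : x < 5) (hy0 : 0 ≤ y) (hy1 : y < 5) :
    vget (rotatedB win x0 y0 d) x y =
      if x0 ≤ x ∧ x < x0 + 3 ∧ y0 ≤ y ∧ y < y0 + 3 then
        (let a := x - x0
         let c := y - y0
         let s : Int × Int :=
           if d = 90 then (2 - c, a) else if d = 180 then (2 - a, 2 - c) else (c, 2 - a)
         vget win (x0 + s.1) (y0 + s.2))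
      else vget win x y := by
  rw [rotatedB, vget]
  rw [PySem.List.pyGetD_map_pyRange_of_nonneg _ 5 x [] hx0 hx1]
  rw [PySem.List.pyGetD_map_pyRange_of_nonneg _ 5 y 0 hy0 hy1]

theorem vget_rotatedB_90 (win : List (List Int)) (x0 y0 : Int) (x y : Int)
    (hx0 : 0 ≤ x) (hx1 : x < 5) (hy0 : 0 ≤ y) (hy1 : y < 5) :
    vget (rotatedB win x0 y0 90) x y =
      if x0 ≤ x ∧ x < x0 + 3 ∧ y0 ≤ y ∧ y < y0 + 3 then
        vget win (x0 + (2 - (y - y0))) (y0 + (x - x0))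
      else vget win x y := by
  rw [vget_rotatedB win x0 y0 90 x y hx0 hx1 hy0 hy1]
  split_ifs <;> first | rfl | omega

theorem vget_rotatedB_180 (win : List (List Int)) (x0 y0 : Int) (x y : Int)
    (hx0 : 0 ≤ x) (hx1 : x < 5) (hy0 : 0 ≤ y) (hy1 : y < 5) :
    vget (rotatedB win x0 y0 180) x y =
      if x0 ≤ x ∧ x < x0 + 3 ∧ y0 ≤ y ∧ y < y0 + 3 then
        vget win (x0 + (2 - (x - x0))) (y0 + (2 - (y - y0)))
      else vget win x y := by
  rw [vget_rotatedB win x0 y0 180 x y hx0 hx1 hy0 hy1]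
  split_ifs <;> first | rfl | omega

theorem vget_rotatedB_270 (win : List (List Int)) (x0 y0 : Int) (x y : Int)
    (hx0 : 0 ≤ x) (hx1 : x < 5) (hy0 : 0 ≤ y) (hy1 : y < 5) :
    vget (rotatedB win x0 y0 270) x y =
      if x0 ≤ x ∧ x < x0 + 3 ∧ y0 ≤ y ∧ y < y0 + 3 then
        vget win (x0 + (y - y0)) (y0 + (2 - (x - x0)))
      else vget win x y := by
  rw [vget_rotatedB win x0 y0 270 x y hx0 hx1 hy0 hy1]
  split_ifs <;> first | rfl | omega

theorem vget_winB (b : List (List Int)) (hwf : wf5 b) (x y : Int)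
    (hx0 : 0 ≤ x) (hx1 : x < 5) (hy0 : 0 ≤ y) (hy1 : y < 5) :
    vget (winB b) x y = vget b x y := by
  obtain ⟨hl, hr⟩ := hwf
  have hb5 : PySem.List.slice b none (some 5) = b.take 5 := by
    rw [PySem.List.slice_to b (by norm_num)]
    rfl
  have hrow : ∀ r : List Int, PySem.List.slice r none (some 5) = r.take 5 := by
    intro r
    rw [PySem.List.slice_to r (by norm_num)]
    rfl
  rw [vget_toGetD _ x y hx0 hy0, vget_toGetD b x y hx0 hy0, winB, hb5]
  have hxl : x.toNat < b.length := by omega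
  have hxt : x.toNat < (b.take 5).length := by
    rw [List.length_take]
    omega
  have h1 : ((b.take 5).map (fun row => PySem.List.slice row none (some 5))).getD x.toNat [] =
      PySem.List.slice ((b.take 5)[x.toNat]) none (some 5) := by
    rw [List.getD_eq_getElem?_getD, List.getElem?_map, List.getElem?_eq_getElem hxt]
    rfl
  rw [h1, hrow, List.getElem_take]
  have hrl : 5 ≤ b[x.toNat].length := by
    have := hr x.toNat (by omega)
    rwa [List.getD_eq_getElem?_getD, List.getElem?_eq_getElem hxl, Option.getD_some] at this
  have h2 : (b[x.toNat].take 5).getD y.toNat 0 = b[x.toNat].getD y.toNat 0 := by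
    rw [List.getD_eq_getElem?_getD, List.getD_eq_getElem?_getD,
      List.getElem?_take_of_lt (by omega : y.toNat < 5)]
  have h3 : b.getD x.toNat [] = b[x.toNat] := by
    rw [List.getD_eq_getElem?_getD, List.getElem?_eq_getElem hxl]
    rfl
  rw [h3]
  exact h2

theorem pre_wf5 (b : List (List Int)) (h : Pre_get_rotate_cand_list b) : wf5 b := by
  obtain ⟨h1, h2⟩ := h
  refine ⟨h1, ?_⟩
  intro i hi
  have hlt : i < b.length := by omega
  have hit : i < (b.take 5).length := by
    rw [List.length_take]
    omega
  have hmem : b[i] ∈ b.take 5 := by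
    have he : (b.take 5)[i] = b[i] := List.getElem_take
    rw [← he]
    exact List.getElem_mem hit
  have := h2 _ hmem
  rw [List.getD_eq_getElem?_getD, List.getElem?_eq_getElem hlt]
  simpa using this

theorem cand_eq (b : List (List Int)) (hwf : wf5 b) (x0 y0 d : Int)
    (hx : 0 ≤ x0) (hx3 : x0 < 3) (hy : 0 ≤ y0) (hy3 : y0 < 3)
    (hd : d = 90 ∨ d = 180 ∨ d = 270) :
    calcInitValue (rotDegA x0 y0 d b) = scoreB (rotatedB (winB b) x0 y0 d) := by
  rw [calcA_eq, scoreB_eq]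
  apply scoreSpec_congr
  intro x y hx0 hx1 hy0 hy1
  have hw1 : wf5 (rot90A x0 y0 b) :=
    wf5_rot90A x0 y0 b hwf (by omega) (by omega) (by omega) (by omega)
  have hw2 : wf5 (rot90A x0 y0 (rot90A x0 y0 b)) :=
    wf5_rot90A x0 y0 _ hw1 (by omega) (by omega) (by omega) (by omega)
  rcases hd with rfl | rfl | rfl
  · rw [rotDegA_90,
      vget_rot90A x0 y0 b hwf (by omega) (by omega) (by omega) (by omega) x y hx0 hx1 hy0 hy1,
      vget_rotatedB_90 (winB b) x0 y0 x y hx0 hx1 hy0 hy1]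
    split_ifs with h
    · rw [vget_winB b hwf _ _ (by omega) (by omega) (by omega) (by omega)]
      congr 1 <;> omega
    · rw [vget_winB b hwf x y hx0 hx1 hy0 hy1]
  · rw [rotDegA_180,
      vget_rot90A x0 y0 (rot90A x0 y0 b) hw1 (by omega) (by omega) (by omega) (by omega)
        x y hx0 hx1 hy0 hy1,
      vget_rotatedB_180 (winB b) x0 y0 x y hx0 hx1 hy0 hy1]
    split_ifs with h
    · rw [vget_rot90A x0 y0 b hwf (by omega) (by omega) (by omega) (by omega)
        (x0 + (y0 + 2 - y)) (y0 + (x - x0)) (by omega) (by omega) (by omega) (by omega)]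
      rw [if_pos (by omega)]
      rw [vget_winB b hwf _ _ (by omega) (by omega) (by omega) (by omega)]
      congr 1 <;> omega
    · rw [vget_rot90A x0 y0 b hwf (by omega) (by omega) (by omega) (by omega)
        x y hx0 hx1 hy0 hy1]
      rw [if_neg h, vget_winB b hwf x y hx0 hx1 hy0 hy1]
  · rw [rotDegA_270,
      vget_rot90A x0 y0 (rot90A x0 y0 (rot90A x0 y0 b)) hw2 (by omega) (by omega) (by omega)
        (by omega) x y hx0 hx1 hy0 hy1,
      vget_rotatedB_270 (winB b) x0 y0 x y hx0 hx1 hy0 hy1]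
    split_ifs with h
    · rw [vget_rot90A x0 y0 (rot90A x0 y0 b) hw1 (by omega) (by omega) (by omega) (by omega)
        (x0 + (y0 + 2 - y)) (y0 + (x - x0)) (by omega) (by omega) (by omega) (by omega)]
      rw [if_pos (by omega)]
      rw [vget_rot90A x0 y0 b hwf (by omega) (by omega) (by omega) (by omega)
        (x0 + (y0 + 2 - (y0 + (x - x0)))) (y0 + (x0 + (y0 + 2 - y) - x0))
        (by omega) (by omega) (by omega) (by omega)]
      rw [if_pos (by omega)]
      rw [vget_winB b hwf _ _ (by omega) (by omega) (by omega) (by omega)]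
      congr 1 <;> omega
    · rw [vget_rot90A x0 y0 (rot90A x0 y0 b) hw1 (by omega) (by omega) (by omega) (by omega)
        x y hx0 hx1 hy0 hy1]
      rw [if_neg h]
      rw [vget_rot90A x0 y0 b hwf (by omega) (by omega) (by omega) (by omega)
        x y hx0 hx1 hy0 hy1]
      rw [if_neg h, vget_winB b hwf x y hx0 hx1 hy0 hy1]

-- ===== VERDICT (by name: the statement is the Claim_ definition above) =====
theorem get_rotate_cand_list_spec : Claim_equal_get_rotate_cand_list := by
  intro board hD hP
  unfold Spec_get_rotate_cand_list
  have hwf : wf5 board := pre_wf5 board hP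
  show get_rotate_cand_list board = get_rotate_cand_list_alt board
  rw [get_rotate_cand_list, get_rotate_cand_list_alt]
  apply PySem.List.foldl_congr_mem
  intro acc x hx
  apply PySem.List.foldl_congr_mem
  intro acc2 y hy
  apply PySem.List.foldl_congr_mem
  intro acc3 d hd
  rw [PySem.List.mem_pyRange_one] at hx hy
  have hdd : d = 90 ∨ d = 180 ∨ d = 270 := by simpa using hd
  show acc3 ++ [[calcInitValue (rotDegA x y d board), d, y, x]] =
    acc3 ++ [[scoreB (rotatedB (winB board) x y d), d, y, x]]
  rw [cand_eq board hwf x y d hx.1 hx.2 hy.1 hy.2 hdd]
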